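-- pv_equiv track=rewrite | github.com/ckn1070/algorithm | programmers/043_fill_puzzle_pieces_84021/sol.py | solution
-- ===== SOURCE A (Python) =====
-- from collections import deque, Counter
--
-- dx = [1, -1, 0, 0]
--
-- dy = [0, 0, 1, -1]
--
-- def bfs_extract(board, target):
--     n = len(board)
--     visited = [[False]*n for _ in range(n)]
--     shapes = []
--
--     for i in range(n):
--         for j in range(n):
--             if not visited[i][j] and board[i][j] == target:
--                 q = deque([(i, j)])
--                 visited[i][j] = True
--                 cells = [(i, j)]
--
--                 while q:
--                     x, y = q.popleft()
--                     for k in range(4):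
--                         nx, ny = x + dx[k], y + dy[k]
--                         if 0 <= nx < n and 0 <= ny < n and not visited[nx][ny] and board[nx][ny] == target:
--                             visited[nx][ny] = True
--                             q.append((nx, ny))
--                             cells.append((nx, ny))
--
--                 shapes.append(cells)
--     return shapes
--
-- def normalize(cells):
--     xs = [x for x, y in cells]
--     ys = [y for x, y in cells]
--     minx, miny = min(xs), min(ys)
--     norm = sorted((x - minx, y - miny) for x, y in cells)
--     return tuple(norm)
--
-- def rotate90(cells):
--     # cells: list/tuple of (x,y) in normalized-ish coordinates
--     # (x,y) -> (y, -x)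
--     rotated = [(y, -x) for x, y in cells]
--     return normalize(rotated)
--
-- def canonical(cells):
--     base = normalize(cells)
--     forms = [base]
--     cur = base
--     for _ in range(3):
--         cur = rotate90(cur)
--         forms.append(cur)
--     return min(forms)  # 대표 형태(회전 불변 키)
--
-- def solution(game_board, table):
--     # 1) table에서 조각들(1) 추출
--     pieces = bfs_extract(table, 1)
--     piece_counter = Counter()
--     piece_size = {}
--
--     for p in pieces:
--         key = canonical(p)
--         piece_counter[key] += 1
--         piece_size[key] = len(p)  # 같은 key는 크기 동일
--
--     # 2) game_board에서 구멍들(0) 추출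
--     holes = bfs_extract(game_board, 0)
--
--     ans = 0
--     for h in holes:
--         key = canonical(h)
--         if piece_counter[key] > 0:
--             piece_counter[key] -= 1
--             ans += len(h)
--     return ans
-- ===== SOURCE B (Python) =====
-- from collections import Counter
--
-- def extract(board, target):
--     # union-find over flat indices i*n+j, linking larger root under smaller root
--     n = len(board)
--     parent = list(range(n * n))
--
--     def find(i):
--         while parent[i] != i:
--             i = parent[i]
--         return i
--
--     for i in range(n):
--         for j in range(n):
--             if board[i][j] == target:
--                 p = i * n + j
--                 if j + 1 < n and board[i][j + 1] == target:
--                     a, b = find(p), find(p + 1)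
--                     if a != b:
--                         parent[max(a, b)] = min(a, b)
--                 if i + 1 < n and board[i + 1][j] == target:
--                     a, b = find(p), find(p + n)
--                     if a != b:
--                         parent[max(a, b)] = min(a, b)
--
--     groups = {}
--     for i in range(n):
--         for j in range(n):
--             if board[i][j] == target:
--                 groups.setdefault(find(i * n + j), []).append((i, j))
--     return list(groups.values())
--
-- def normalize(cells):
--     minx = min(x for x, y in cells)
--     miny = min(y for x, y in cells)
--     return tuple(sorted((x - minx, y - miny) for x, y in cells))
--
-- def canonical(cells):
--     # rotation-invariant key: least normalized form over the four closed-form rotations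
--     return min(normalize([rot(x, y) for x, y in cells]) for rot in
--                (lambda x, y: (x, y),
--                 lambda x, y: (y, -x),
--                 lambda x, y: (-x, -y),
--                 lambda x, y: (-y, x)))
--
-- def solution(game_board, table):
--     piece_count = Counter(canonical(p) for p in extract(table, 1))
--     hole_count = Counter(canonical(h) for h in extract(game_board, 0))
--     # a canonical key lists the cells of the shape, so its len is the shape's size
--     return sum(min(piece_count[k], c) * len(k) for k, c in hole_count.items())
-- ===== Notes on version B (the rewrite author's own statement) =====
-- stated objective: alternative
-- what changed: B replaces A's BFS flood fill (deque + visited matrix) by a union-find component extractor (flat parent array over i*n+j, link-by-index unions over right/down edges, then a dict bucketing cells by find-root), computes the rotation-invariant key as the minimum over the four closed-form rotation images instead of A's iterated rotate-then-renormalize, and replaces A's stateful greedy Counter-decrement matching by the closed-form sum min(piece_count[k], hole_count[k]) * len(k) over two Counters.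
import Mathlib
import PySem

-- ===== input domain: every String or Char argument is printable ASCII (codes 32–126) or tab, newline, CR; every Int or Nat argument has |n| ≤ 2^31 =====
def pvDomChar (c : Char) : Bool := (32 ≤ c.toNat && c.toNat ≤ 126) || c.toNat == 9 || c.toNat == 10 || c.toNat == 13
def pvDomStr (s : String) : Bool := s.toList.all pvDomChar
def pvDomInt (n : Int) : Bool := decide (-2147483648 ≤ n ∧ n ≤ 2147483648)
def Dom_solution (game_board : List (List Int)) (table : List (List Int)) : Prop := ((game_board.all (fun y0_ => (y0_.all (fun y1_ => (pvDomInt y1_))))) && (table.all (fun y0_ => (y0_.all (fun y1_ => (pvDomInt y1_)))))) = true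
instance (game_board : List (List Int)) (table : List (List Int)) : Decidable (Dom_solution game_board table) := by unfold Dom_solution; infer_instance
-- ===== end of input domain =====

-- B replaces A's BFS flood fill by a union-find component extractor (flat parent array,
-- link-by-index, bucketed through a dict keyed by root) and A's stateful greedy matching by a
-- closed-form sum over two Counters (objective: alternative).

-- ===== SHARED HELPERS (identical code in Source A and Source B: normalize, tuple min; board access) =====
-- board[x][y] (in range under Pre_; default 0 unreachable there)
def bgetI (b : List (List Int)) (x y : Int) : Int := (b.getD x.toNat []).getD y.toNat 0

-- normalize(cells): shift so the mins are 0, then Python-sort the pairs (lexicographic)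
def normShape (cells : List (Int × Int)) : List (Int × Int) :=
  let minx := (PySem.List.min? (cells.map (fun p => p.1)) (fun v => v)).getD 0
  let miny := (PySem.List.min? (cells.map (fun p => p.2)) (fun v => v)).getD 0
  PySem.List.sorted (cells.map (fun p => (p.1 - minx, p.2 - miny)))
    (fun p => (toLex p : Lex (Int × Int))) false

-- Python `<` on tuples / lists of tuples (exact lexicographic comparison, ported by hand)
def listLtB : List (Int × Int) → List (Int × Int) → Bool
  | [], [] => false
  | [], _ :: _ => true
  | _ :: _, [] => false
  | p :: ps, q :: qs => (p.1 < q.1 || (p.1 == q.1 && p.2 < q.2)) || (p == q && listLtB ps qs)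

-- min(forms): Python min keeps the first minimum
def formMin (base : List (Int × Int)) (rest : List (List (Int × Int))) : List (Int × Int) :=
  rest.foldl (fun m f => if listLtB f m then f else m) base

-- ===== PORT A =====
def dxL : List Int := [1, -1, 0, 0]
def dyL : List Int := [0, 0, 1, -1]

-- visited[x][y] (default true out of range; in real runs visited is n×n and indices are in range)
def vget (v : List (List Bool)) (x y : Int) : Bool := (v.getD x.toNat []).getD y.toNat true
-- visited[x][y] = True
def vset (v : List (List Bool)) (x y : Int) : List (List Bool) :=
  v.set x.toNat ((v.getD x.toNat []).set y.toNat true)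

def countFalse : List (List Bool) → Nat
  | [] => 0
  | r :: t => r.count false + countFalse t

-- one direction k of the inner `for k in range(4)` loop; state = (visited, q, cells)
def bfsStep (board : List (List Int)) (target n x y : Int)
    (σ : List (List Bool) × List (Int × Int) × List (Int × Int)) (k : Int) :
    List (List Bool) × List (Int × Int) × List (Int × Int) :=
  let nx := x + PySem.List.pyGetD dxL k 0
  let ny := y + PySem.List.pyGetD dyL k 0
  if 0 ≤ nx ∧ nx < n ∧ 0 ≤ ny ∧ ny < n ∧ vget σ.1 nx ny = false ∧ bgetI board nx ny = target
  then (vset σ.1 nx ny, σ.2.1 ++ [(nx, ny)], σ.2.2 ++ [(nx, ny)])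
  else σ

-- termination helpers for the `while q` loop (cited by bfsLoop's decreasing_by)
lemma count_false_set_lt (r : List Bool) (b : Nat) (h : r.getD b true = false) :
    (r.set b true).count false < r.count false := by
  induction r generalizing b with
  | nil => simp [List.getD] at h
  | cons x t ih =>
    cases b with
    | zero => simp_all [List.getD]
    | succ b =>
      have := ih b (by simpa [List.getD] using h)
      simp [List.count_cons]
      omega

lemma countFalse_vset_lt_aux (v : List (List Bool)) (a b : Nat)
    (h : (v.getD a []).getD b true = false) :
    countFalse (v.set a ((v.getD a []).set b true)) < countFalse v := by
  induction v generalizing a with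
  | nil => simp [List.getD] at h
  | cons r t ih =>
    cases a with
    | zero =>
      rw [List.getD_cons_zero] at h ⊢
      rw [List.set_cons_zero]
      have := count_false_set_lt r b h
      simp only [countFalse]
      omega
    | succ a =>
      rw [List.getD_cons_succ] at h ⊢
      rw [List.set_cons_succ]
      have := ih a h
      simp only [countFalse]
      omega

lemma countFalse_vset_lt (v : List (List Bool)) (x y : Int)
    (h : vget v x y = false) : countFalse (vset v x y) < countFalse v := by
  exact countFalse_vset_lt_aux v x.toNat y.toNat h

lemma bfsStep_measure (board : List (List Int)) (target n x y : Int)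
    (σ : List (List Bool) × List (Int × Int) × List (Int × Int)) (k : Int) :
    2 * countFalse (bfsStep board target n x y σ k).1 + (bfsStep board target n x y σ k).2.1.length
      ≤ 2 * countFalse σ.1 + σ.2.1.length := by
  unfold bfsStep
  dsimp only
  split
  · next h =>
    have := countFalse_vset_lt σ.1 _ _ h.2.2.2.2.1
    simp
    omega
  · exact le_refl _

lemma bfsFold_measure (board : List (List Int)) (target n x y : Int)
    (ks : List Int) (σ : List (List Bool) × List (Int × Int) × List (Int × Int)) :
    2 * countFalse ((ks.foldl (bfsStep board target n x y) σ)).1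
        + ((ks.foldl (bfsStep board target n x y) σ)).2.1.length
      ≤ 2 * countFalse σ.1 + σ.2.1.length := by
  induction ks generalizing σ with
  | nil => exact le_refl _
  | cons k ks ih =>
    exact le_trans (ih (bfsStep board target n x y σ k)) (bfsStep_measure board target n x y σ k)

-- the `while q:` loop of bfs_extract
def bfsLoop (board : List (List Int)) (target n : Int)
    (v : List (List Bool)) (q c : List (Int × Int)) :
    List (List Bool) × List (Int × Int) :=
  match q with
  | [] => (v, c)
  | (x, y) :: qt =>
    let σ := (PySem.List.pyRange 0 4 1).foldl (bfsStep board target n x y) (v, qt, c)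
    bfsLoop board target n σ.1 σ.2.1 σ.2.2
termination_by 2 * countFalse v + q.length
decreasing_by
  have := bfsFold_measure board target n x y (PySem.List.pyRange 0 4 1) (v, qt, c)
  simp at this ⊢
  omega

-- bfs_extract(board, target)
def bfsExtract (board : List (List Int)) (target : Int) : List (List (Int × Int)) :=
  let n : Int := board.length
  let visited0 := List.replicate board.length (List.replicate board.length false)
  let res := (PySem.List.pyRange 0 n 1).foldl (fun st i =>
    (PySem.List.pyRange 0 n 1).foldl
      (fun (st : List (List Bool) × List (List (Int × Int))) j =>
        if vget st.1 i j = false ∧ bgetI board i j = target then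
          let r := bfsLoop board target n (vset st.1 i j) [(i, j)] [(i, j)]
          (r.1, st.2 ++ [r.2])
        else st) st) (visited0, ([] : List (List (Int × Int))))
  res.2

def rotate90 (cells : List (Int × Int)) : List (Int × Int) :=
  normShape (cells.map (fun p => (p.2, -p.1)))

def canonical (cells : List (Int × Int)) : List (Int × Int) :=
  let base := normShape cells
  let c1 := rotate90 base
  let c2 := rotate90 c1
  let c3 := rotate90 c2
  formMin base [c1, c2, c3]

def solution (game_board : List (List Int)) (table : List (List Int)) : Int :=
  let pieces := bfsExtract table 1
  let st := pieces.foldl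
    (fun (st : PySem.Dict (List (Int × Int)) Int × PySem.Dict (List (Int × Int)) Int) p =>
      let key := canonical p
      (st.1.insert key (st.1.getD key 0 + 1), st.2.insert key (p.length : Int)))
    (PySem.Dict.empty, PySem.Dict.empty)
  let holes := bfsExtract game_board 0
  let fin := holes.foldl
    (fun (st : PySem.Dict (List (Int × Int)) Int × Int) h =>
      let key := canonical h
      if st.1.getD key 0 > 0 then (st.1.insert key (st.1.getD key 0 - 1), st.2 + (h.length : Int))
      else st)
    (st.1, (0 : Int))
  fin.2

-- ===== PORT B =====
-- find(i): follow parents to the root (pure loop, no compression); the loop terminates because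
-- every union links the larger root below the smaller one, so parent[i] ≤ i; fuel = len+1 is
-- enough for any chain and is exact on every state the algorithm reaches.
def ufFindFuel : Nat → List Int → Int → Int
  | 0, _, i => i
  | f + 1, parent, i =>
    let p := PySem.List.pyGetD parent i 0   -- parent[i]; i is always in range where B calls find
    if p ≠ i then ufFindFuel f parent p else i

def ufFind (parent : List Int) (i : Int) : Int := ufFindFuel (parent.length + 1) parent i

-- a, b = find(p), find(q); if a != b: parent[max(a, b)] = min(a, b)
def ufUnion (parent : List Int) (p q : Int) : List Int :=
  let a := ufFind parent p
  let b := ufFind parent q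
  if a ≠ b then parent.set (max a b).toNat (min a b) else parent

-- the union phase: for each target cell, union with its right and down target neighbours
def ufBuild (board : List (List Int)) (target : Int) : List Int :=
  let n : Int := board.length
  (PySem.List.pyRange 0 n 1).foldl (fun par i =>
    (PySem.List.pyRange 0 n 1).foldl (fun (par : List Int) j =>
      if bgetI board i j = target then
        let p := i * n + j
        let par1 := if j + 1 < n ∧ bgetI board i (j + 1) = target then ufUnion par p (p + 1) else par
        if i + 1 < n ∧ bgetI board (i + 1) j = target then ufUnion par1 p (p + n) else par1
      else par) par)
    (PySem.List.pyRange 0 (n * n) 1)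

-- groups.setdefault(find(i*n+j), []).append((i, j))  ==  d[k] = d.get(k, []) + [(i, j)]
def ufGroups (board : List (List Int)) (target : Int) (parent : List Int) :
    PySem.Dict Int (List (Int × Int)) :=
  let n : Int := board.length
  (PySem.List.pyRange 0 n 1).foldl (fun d i =>
    (PySem.List.pyRange 0 n 1).foldl (fun (d : PySem.Dict Int (List (Int × Int))) j =>
      if bgetI board i j = target then d.modify (ufFind parent (i * n + j)) [] (· ++ [(i, j)])
      else d) d)
    PySem.Dict.empty

def extractUF (board : List (List Int)) (target : Int) : List (List (Int × Int)) :=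
  (ufGroups board target (ufBuild board target)).values

-- canonical key as the minimum over the four closed-form rotation images of the cells
def canonicalAlt (cells : List (Int × Int)) : List (Int × Int) :=
  formMin (normShape (cells.map (fun p => (p.1, p.2))))
    [normShape (cells.map (fun p => (p.2, -p.1))),
     normShape (cells.map (fun p => (-p.1, -p.2))),
     normShape (cells.map (fun p => (-p.2, p.1)))]

def solution_alt (game_board : List (List Int)) (table : List (List Int)) : Int :=
  let pieceCount := PySem.Dict.counter ((extractUF table 1).map canonicalAlt)
  let holeCount := PySem.Dict.counter ((extractUF game_board 0).map canonicalAlt)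
  holeCount.items.foldl (fun acc kc => acc + min (pieceCount.getD kc.1 0) kc.2 * (kc.1.length : Int)) 0

-- ===== PRECONDITION & SPEC =====
-- Pre_ excludes exactly the inputs where Python A raises IndexError: a row shorter than the
-- number of rows (board[i][j] is read for every i, j < len(board)).
def Pre_solution (game_board : List (List Int)) (table : List (List Int)) : Prop :=
  (∀ r ∈ game_board, game_board.length ≤ r.length) ∧ (∀ r ∈ table, table.length ≤ r.length)
instance (game_board : List (List Int)) (table : List (List Int)) : Decidable (Pre_solution game_board table) := by unfold Pre_solution; infer_instance

def pvWitness_solution : List (List Int) × List (List Int) := ([[1, 0], [1, 1]], [[0, 1], [0, 0]])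

def Spec_solution (game_board : List (List Int)) (table : List (List Int)) (out : Int) : Prop := out = solution_alt game_board table
instance (game_board : List (List Int)) (table : List (List Int)) (out : Int) : Decidable (Spec_solution game_board table out) := by unfold Spec_solution; infer_instance

-- ===== CLAIM (what is proved, stated in full; the proofs are below) =====
def Claim_equal_solution : Prop := ∀ (game_board : List (List Int)) (table : List (List Int)), Dom_solution game_board table → Pre_solution game_board table → Spec_solution game_board table (solution game_board table)

-- ===== LEMMAS AND PROOFS =====


-- ---- the grid graph: target cells, 4-adjacency, connectivity ----

def Tgt (b : List (List Int)) (t : Int) (c : Int × Int) : Prop :=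
  0 ≤ c.1 ∧ c.1 < (b.length : Int) ∧ 0 ≤ c.2 ∧ c.2 < (b.length : Int) ∧ bgetI b c.1 c.2 = t

def Adjc (b : List (List Int)) (t : Int) (c d : Int × Int) : Prop :=
  Tgt b t c ∧ Tgt b t d ∧
    ((d.1 = c.1 ∧ (d.2 = c.2 + 1 ∨ c.2 = d.2 + 1)) ∨ (d.2 = c.2 ∧ (d.1 = c.1 + 1 ∨ c.1 = d.1 + 1)))

def Conn (b : List (List Int)) (t : Int) : (Int × Int) → (Int × Int) → Prop :=
  Relation.ReflTransGen (Adjc b t)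

lemma Adjc_symm (b : List (List Int)) (t : Int) : Symmetric (Adjc b t) := by
  rintro c d ⟨hc, hd, h⟩
  exact ⟨hd, hc, by tauto⟩

lemma Conn_symm (b : List (List Int)) (t : Int) : Symmetric (Conn b t) :=
  Relation.ReflTransGen.symmetric (Adjc_symm b t)

lemma Conn_trans {b : List (List Int)} {t : Int} {x y z : Int × Int}
    (h1 : Conn b t x y) (h2 : Conn b t y z) : Conn b t x z :=
  Relation.ReflTransGen.trans h1 h2

lemma Conn_refl (b : List (List Int)) (t : Int) (x : Int × Int) : Conn b t x x :=
  Relation.ReflTransGen.refl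

lemma Conn_tgt_right {b : List (List Int)} {t : Int} {x y : Int × Int}
    (h : Conn b t x y) (hx : Tgt b t x) : Tgt b t y := by
  induction h with
  | refl => exact hx
  | tail _ hadj ih => exact hadj.2.1

-- ---- flat indices and raster order ----

def idxC (n : Int) (c : Int × Int) : Int := c.1 * n + c.2

def cellOf (n : Int) (m : Int) : Int × Int := (m / n, m % n)

lemma cellOf_idxC {n : Int} {c : Int × Int} (h1 : 0 ≤ c.1) (h2 : 0 ≤ c.2) (h3 : c.2 < n) :
    cellOf n (idxC n c) = c := by
  obtain ⟨x, y⟩ := c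
  simp only [cellOf, idxC]
  have hn : 0 < n := lt_of_le_of_lt h2 h3
  have hdiv : (x * n + y) / n = x := by
    rw [add_comm, Int.add_mul_ediv_right _ _ (by omega : n ≠ 0), Int.ediv_eq_zero_of_lt h2 h3]
    ring
  have hmod : (x * n + y) % n = y := by
    rw [add_comm, Int.add_mul_emod_self_right]
    exact Int.emod_eq_of_lt h2 h3
  simp [hdiv, hmod]

lemma idxC_nonneg {n : Int} {c : Int × Int} (h1 : 0 ≤ c.1) (h2 : 0 ≤ c.2) (h3 : c.2 < n) :
    0 ≤ idxC n c := by
  unfold idxC; nlinarith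

lemma idxC_lt {n : Int} {c : Int × Int} (h1 : c.1 < n) (h2 : c.2 < n) (h0 : 0 ≤ c.1) :
    idxC n c < n * n := by
  unfold idxC; nlinarith

def raster (n : Int) : List (Int × Int) :=
  (PySem.List.pyRange 0 n 1).flatMap (fun i => (PySem.List.pyRange 0 n 1).map (fun j => (i, j)))

lemma mem_raster {n : Int} {c : Int × Int} :
    c ∈ raster n ↔ 0 ≤ c.1 ∧ c.1 < n ∧ 0 ≤ c.2 ∧ c.2 < n := by
  obtain ⟨x, y⟩ := c
  simp [raster, List.mem_flatMap, PySem.List.mem_pyRange_one]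
  tauto

lemma raster_nodup (n : Int) : (raster n).Nodup := by
  unfold raster
  rw [List.nodup_flatMap]
  constructor
  · intro i _
    exact (PySem.List.nodup_pyRange_one 0 n).map (fun a b h => by simpa using h)
  · refine (PySem.List.nodup_pyRange_one 0 n).imp ?_
    intro a b hne c hc hc'
    simp only [List.mem_map] at hc hc'
    obtain ⟨j1, _, rfl⟩ := hc
    obtain ⟨j2, _, h2⟩ := hc'
    exact hne (by simpa using (congrArg Prod.fst h2).symm)

lemma foldl_double_pyRange {α : Type} (n : Int) (f : α → (Int × Int) → α) (init : α) :
    (PySem.List.pyRange 0 n 1).foldl (fun s i =>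
      (PySem.List.pyRange 0 n 1).foldl (fun s j => f s (i, j)) s) init
    = (raster n).foldl f init := by
  rw [raster, List.foldl_flatMap]
  congr 1
  funext s i
  rw [List.foldl_map]


-- ---- union-find: descent invariant, find, union ----

def ufDescent (par : List Int) : Prop :=
  ∀ k : Nat, k < par.length → 0 ≤ par.getD k 0 ∧ par.getD k 0 ≤ (k : Int)

lemma ufFindFuel_succ {par : List Int} {i : Int} (g : Nat) (h0 : 0 ≤ i) :
    ufFindFuel (g + 1) par i
      = if par.getD i.toNat 0 ≠ i then ufFindFuel g par (par.getD i.toNat 0) else i := by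
  simp [ufFindFuel, PySem.List.pyGetD_of_nonneg _ _ h0, List.getD]

lemma ufFindFuel_root {par : List Int} {i : Int} (f : Nat)
    (h0 : 0 ≤ i) (hroot : par.getD i.toNat 0 = i) : ufFindFuel f par i = i := by
  cases f with
  | zero => rfl
  | succ g => rw [ufFindFuel_succ g h0, hroot]; simp

lemma ufFindFuel_stable {par : List Int} (hd : ufDescent par) :
    ∀ (m : Nat) (i : Int) (f₁ f₂ : Nat), i.toNat ≤ m → 0 ≤ i → i.toNat < par.length →
      i < (f₁ : Int) → i < (f₂ : Int) → ufFindFuel f₁ par i = ufFindFuel f₂ par i := by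
  intro m
  induction m with
  | zero =>
    intro i f₁ f₂ hm h0 hl hf₁ hf₂
    have hi : i = 0 := by omega
    subst hi
    obtain ⟨g₁, rfl⟩ : ∃ g, f₁ = g + 1 := ⟨f₁ - 1, by omega⟩
    obtain ⟨g₂, rfl⟩ : ∃ g, f₂ = g + 1 := ⟨f₂ - 1, by omega⟩
    have h := hd 0 (by omega)
    have hroot : par.getD (0 : Int).toNat 0 = (0 : Int) := by
      simp only [Int.toNat_zero]
      omega
    rw [ufFindFuel_root _ (le_refl 0) hroot, ufFindFuel_root _ (le_refl 0) hroot]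
  | succ m ih =>
    intro i f₁ f₂ hm h0 hl hf₁ hf₂
    obtain ⟨g₁, rfl⟩ : ∃ g, f₁ = g + 1 := ⟨f₁ - 1, by omega⟩
    obtain ⟨g₂, rfl⟩ : ∃ g, f₂ = g + 1 := ⟨f₂ - 1, by omega⟩
    rw [ufFindFuel_succ g₁ h0, ufFindFuel_succ g₂ h0]
    by_cases hp : par.getD i.toNat 0 = i
    · rw [hp]; simp
    · simp only [ne_eq, hp, not_false_iff, if_true]
      have hdk := hd i.toNat hl
      have hlt : par.getD i.toNat 0 < i := by omega
      have h0' : 0 ≤ par.getD i.toNat 0 := hdk.1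
      exact ih _ g₁ g₂ (by omega) h0' (by omega) (by omega) (by omega)
-- every non-trivial parent pointer connects two cells of the same component
def ufConnInv (b : List (List Int)) (t : Int) (par : List Int) : Prop :=
  ∀ k : Nat, k < par.length → par.getD k 0 ≠ (k : Int) →
    Conn b t (cellOf (b.length : Int) (par.getD k 0)) (cellOf (b.length : Int) (k : Int))

lemma ufFind_eq_fuel {par : List Int} (hd : ufDescent par) {i : Int} {f : Nat}
    (h0 : 0 ≤ i) (hl : i.toNat < par.length) (hf : i < (f : Int)) :
    ufFind par i = ufFindFuel f par i :=
  ufFindFuel_stable hd i.toNat i _ f (le_refl _) h0 hl (by omega) hf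

lemma ufFind_root {par : List Int} {i : Int}
    (h0 : 0 ≤ i) (hroot : par.getD i.toNat 0 = i) : ufFind par i = i :=
  ufFindFuel_root _ h0 hroot

lemma ufFind_step {par : List Int} (hd : ufDescent par) {i : Int} (h0 : 0 ≤ i)
    (hl : i.toNat < par.length) (hp : par.getD i.toNat 0 ≠ i) :
    ufFind par i = ufFind par (par.getD i.toNat 0) := by
  have hdk := hd i.toNat hl
  rw [ufFind_eq_fuel hd h0 hl (f := i.toNat + 1) (by omega), ufFindFuel_succ _ h0, if_pos hp]
  exact (ufFind_eq_fuel hd hdk.1 (by omega) (by omega)).symm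

lemma ufFind_props {b : List (List Int)} {t : Int} {par : List Int}
    (hd : ufDescent par) (hc : ufConnInv b t par) :
    ∀ (m : Nat) (i : Int), i.toNat ≤ m → 0 ≤ i → i.toNat < par.length →
      0 ≤ ufFind par i ∧ ufFind par i ≤ i ∧ (ufFind par i).toNat < par.length ∧
      par.getD (ufFind par i).toNat 0 = ufFind par i ∧
      Conn b t (cellOf (b.length : Int) (ufFind par i)) (cellOf (b.length : Int) i) := by
  intro m
  induction m with
  | zero =>
    intro i hm h0 hl
    have hi : i = 0 := by omega
    subst hi
    have hdk := hd 0 (by omega)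
    have hroot : par.getD (0 : Int).toNat 0 = (0 : Int) := by
      simp only [Int.toNat_zero]; omega
    rw [ufFind_root (le_refl 0) hroot]
    exact ⟨le_refl _, le_refl _, by simpa using hl, hroot, Conn_refl _ _ _⟩
  | succ m ih =>
    intro i hm h0 hl
    by_cases hp : par.getD i.toNat 0 = i
    · rw [ufFind_root h0 hp]
      exact ⟨h0, le_refl _, hl, hp, Conn_refl _ _ _⟩
    · have hdk := hd i.toNat hl
      have hlt : par.getD i.toNat 0 < i := by omega
      rw [ufFind_step hd h0 hl hp]
      obtain ⟨p1, p2, p3, p4, p5⟩ := ih (par.getD i.toNat 0) (by omega) hdk.1 (by omega)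
      have hti : ((i.toNat : Nat) : Int) = i := Int.toNat_of_nonneg h0
      have hcc := hc i.toNat hl (by rw [hti]; exact hp)
      rw [hti] at hcc
      refine ⟨p1, by omega, p3, p4, Conn_trans p5 hcc⟩

lemma ufDescent_set {par : List Int} (hd : ufDescent par) {ra rb : Int}
    (_h_b0 : 0 ≤ rb) (hle : rb ≤ ra) : ufDescent (par.set ra.toNat rb) := by
  intro k hk
  rw [List.length_set] at hk
  by_cases hk' : k = ra.toNat
  · rw [hk']
    rw [show (par.set ra.toNat rb).getD ra.toNat 0 = rb by
      simp [List.getD, hk' ▸ hk]]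
    omega
  · rw [show (par.set ra.toNat rb).getD k 0 = par.getD k 0 by
      simp [List.getD, List.getElem?_set_ne (by omega : ra.toNat ≠ k)]]
    exact hd k hk

lemma ufFind_set {par : List Int} (hd : ufDescent par) {ra rb : Int}
    (h_a0 : 0 ≤ ra) (h_al : ra.toNat < par.length) (h_b0 : 0 ≤ rb) (h_bl : rb < ra)
    (h_ar : par.getD ra.toNat 0 = ra) (h_br : par.getD rb.toNat 0 = rb) :
    ∀ (m : Nat) (i : Int), i.toNat ≤ m → 0 ≤ i → i.toNat < par.length →
      ufFind (par.set ra.toNat rb) i = if ufFind par i = ra then rb else ufFind par i := by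
  have hd' : ufDescent (par.set ra.toNat rb) := ufDescent_set hd h_b0 (le_of_lt h_bl)
  have hbnat : rb.toNat ≠ ra.toNat := by omega
  have hbr' : (par.set ra.toNat rb).getD rb.toNat 0 = rb := by
    rw [show (par.set ra.toNat rb).getD rb.toNat 0 = par.getD rb.toNat 0 by
      simp [List.getD, List.getElem?_set_ne (by omega : ra.toNat ≠ rb.toNat)]]
    exact h_br
  intro m
  induction m with
  | zero =>
    intro i hm h0 hl
    have hi : i = 0 := by omega
    subst hi
    have hra : ra ≠ 0 := by omega
    have hroot : par.getD (0 : Int).toNat 0 = (0 : Int) := by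
      have := hd 0 (by omega); simp only [Int.toNat_zero]; omega
    have hroot' : (par.set ra.toNat rb).getD (0 : Int).toNat 0 = (0 : Int) := by
      have := hd' 0 (by simpa using hl); simp only [Int.toNat_zero]
      have h := hd' 0 (by simp [List.length_set]; omega)
      omega
    rw [ufFind_root (le_refl 0) hroot, ufFind_root (le_refl 0) hroot', if_neg (by omega)]
  | succ m ih =>
    intro i hm h0 hl
    by_cases hia : i.toNat = ra.toNat
    · have hieq : i = ra := by omega
      subst hieq
      have hset : (par.set i.toNat rb).getD i.toNat 0 = rb := by simp [List.getD, h_al]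
      rw [ufFind_step hd' h0 (by simpa using hl) (by rw [hset]; omega), hset,
        ufFind_root h_b0 hbr', ufFind_root h0 h_ar, if_pos rfl]
    · have hset : (par.set ra.toNat rb).getD i.toNat 0 = par.getD i.toNat 0 := by
        simp [List.getD, List.getElem?_set_ne (by omega : ra.toNat ≠ i.toNat)]
      by_cases hp : par.getD i.toNat 0 = i
      · rw [ufFind_root h0 (by rw [hset]; exact hp), ufFind_root h0 hp, if_neg (by omega)]
      · have hdk := hd i.toNat hl
        have hlt : par.getD i.toNat 0 < i := by omega
        rw [ufFind_step hd' h0 (by simpa using hl) (by rw [hset]; exact hp), hset,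
          ufFind_step hd h0 hl hp]
        exact ih (par.getD i.toNat 0) (by omega) hdk.1 (by omega)

lemma ufConnInv_set {b : List (List Int)} {t : Int} {par : List Int} (hc : ufConnInv b t par)
    {ra rb : Int} (h_a0 : 0 ≤ ra) (h_al : ra.toNat < par.length) (_h_b0 : 0 ≤ rb)
    (hconn : Conn b t (cellOf (b.length : Int) rb) (cellOf (b.length : Int) ra)) :
    ufConnInv b t (par.set ra.toNat rb) := by
  intro k hk hkne
  rw [List.length_set] at hk
  by_cases hk' : k = ra.toNat
  · rw [hk'] at hkne ⊢
    rw [show (par.set ra.toNat rb).getD ra.toNat 0 = rb by simp [List.getD, h_al]] at hkne ⊢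
    rw [show ((ra.toNat : Nat) : Int) = ra by omega]
    exact hconn
  · rw [show (par.set ra.toNat rb).getD k 0 = par.getD k 0 by
      simp [List.getD, List.getElem?_set_ne (by omega : ra.toNat ≠ k)]] at hkne ⊢
    exact hc k hk hkne

-- bundled union-find invariant for the build phase
def UFgood (b : List (List Int)) (t : Int) (par : List Int) : Prop :=
  par.length = b.length * b.length ∧ ufDescent par ∧ ufConnInv b t par

lemma ufUnion_length (par : List Int) (p q : Int) : (ufUnion par p q).length = par.length := by
  unfold ufUnion
  dsimp only
  split <;> simp

lemma ufFind_in_range {b : List (List Int)} {t : Int} {par : List Int}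
    (hg : UFgood b t par) {i : Int} (h0 : 0 ≤ i) (hl : i.toNat < par.length) :
    0 ≤ ufFind par i ∧ (ufFind par i).toNat < par.length ∧
      par.getD (ufFind par i).toNat 0 = ufFind par i ∧
      Conn b t (cellOf (b.length : Int) (ufFind par i)) (cellOf (b.length : Int) i) := by
  obtain ⟨p1, _, p3, p4, p5⟩ := ufFind_props hg.2.1 hg.2.2 i.toNat i (le_refl _) h0 hl
  exact ⟨p1, p3, p4, p5⟩

lemma ufUnion_good {b : List (List Int)} {t : Int} {par : List Int} (hg : UFgood b t par)
    {p q : Int} (hp0 : 0 ≤ p) (hpl : p.toNat < par.length) (hq0 : 0 ≤ q)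
    (hql : q.toNat < par.length)
    (hconn : Conn b t (cellOf (b.length : Int) p) (cellOf (b.length : Int) q)) :
    UFgood b t (ufUnion par p q) := by
  obtain ⟨a1, a2, a3, a4⟩ := ufFind_in_range hg hp0 hpl
  obtain ⟨b1, b2, b3, b4⟩ := ufFind_in_range hg hq0 hql
  have hab : Conn b t (cellOf (b.length : Int) (ufFind par p))
      (cellOf (b.length : Int) (ufFind par q)) :=
    Conn_trans a4 (Conn_trans hconn (Conn_symm b t b4))
  unfold ufUnion
  dsimp only
  split
  · next hne =>
    have hra0 : 0 ≤ max (ufFind par p) (ufFind par q) := le_trans a1 (le_max_left _ _)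
    have hrb0 : 0 ≤ min (ufFind par p) (ufFind par q) := le_min a1 b1
    have hral : (max (ufFind par p) (ufFind par q)).toNat < par.length := by
      rcases max_choice (ufFind par p) (ufFind par q) with h | h <;> rw [h] <;> assumption
    have hcmm : Conn b t (cellOf (b.length : Int) (min (ufFind par p) (ufFind par q)))
        (cellOf (b.length : Int) (max (ufFind par p) (ufFind par q))) := by
      rcases le_total (ufFind par p) (ufFind par q) with h | h
      · rw [max_eq_right h, min_eq_left h]; exact hab
      · rw [max_eq_left h, min_eq_right h]; exact Conn_symm b t hab
    exact ⟨by rw [List.length_set]; exact hg.1,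
      ufDescent_set hg.2.1 hrb0 min_le_max,
      ufConnInv_set hg.2.2 hra0 hral hrb0 hcmm⟩
  · exact hg

lemma ufUnion_find {b : List (List Int)} {t : Int} {par : List Int} (hg : UFgood b t par)
    {p q : Int} (hp0 : 0 ≤ p) (hpl : p.toNat < par.length) (hq0 : 0 ≤ q)
    (hql : q.toNat < par.length) {i : Int} (hi0 : 0 ≤ i) (hil : i.toNat < par.length) :
    ufFind (ufUnion par p q) i
      = if ufFind par i = max (ufFind par p) (ufFind par q)
        then min (ufFind par p) (ufFind par q) else ufFind par i := by
  obtain ⟨a1, a2, a3, _⟩ := ufFind_in_range hg hp0 hpl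
  obtain ⟨b1, b2, b3, _⟩ := ufFind_in_range hg hq0 hql
  unfold ufUnion
  dsimp only
  split
  · next hne =>
    have hra0 : 0 ≤ max (ufFind par p) (ufFind par q) := le_trans a1 (le_max_left _ _)
    have hrb0 : 0 ≤ min (ufFind par p) (ufFind par q) := le_min a1 b1
    have hral : (max (ufFind par p) (ufFind par q)).toNat < par.length := by
      rcases max_choice (ufFind par p) (ufFind par q) with h | h <;> rw [h] <;> assumption
    have hmaxr : par.getD (max (ufFind par p) (ufFind par q)).toNat 0
        = max (ufFind par p) (ufFind par q) := by
      rcases max_choice (ufFind par p) (ufFind par q) with h | h <;> rw [h] <;> assumption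
    have hminr : par.getD (min (ufFind par p) (ufFind par q)).toNat 0
        = min (ufFind par p) (ufFind par q) := by
      rcases min_choice (ufFind par p) (ufFind par q) with h | h <;> rw [h] <;> assumption
    have hmm : min (ufFind par p) (ufFind par q) < max (ufFind par p) (ufFind par q) :=
      min_lt_max.mpr hne
    exact ufFind_set hg.2.1 hra0 hral hrb0 hmm hmaxr hminr i.toNat i (le_refl _) hi0 hil
  · next heq =>
    have heq' : ufFind par p = ufFind par q := by omega
    rw [heq', max_self, min_self]
    split <;> omega

lemma ufUnion_preserves {b : List (List Int)} {t : Int} {par : List Int} (hg : UFgood b t par)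
    {p q : Int} (hp0 : 0 ≤ p) (hpl : p.toNat < par.length) (hq0 : 0 ≤ q)
    (hql : q.toNat < par.length) {i j : Int} (hi0 : 0 ≤ i) (hil : i.toNat < par.length)
    (hj0 : 0 ≤ j) (hjl : j.toNat < par.length) (h : ufFind par i = ufFind par j) :
    ufFind (ufUnion par p q) i = ufFind (ufUnion par p q) j := by
  rw [ufUnion_find hg hp0 hpl hq0 hql hi0 hil, ufUnion_find hg hp0 hpl hq0 hql hj0 hjl, h]

lemma ufUnion_joins {b : List (List Int)} {t : Int} {par : List Int} (hg : UFgood b t par)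
    {p q : Int} (hp0 : 0 ≤ p) (hpl : p.toNat < par.length) (hq0 : 0 ≤ q)
    (hql : q.toNat < par.length) :
    ufFind (ufUnion par p q) p = ufFind (ufUnion par p q) q := by
  rw [ufUnion_find hg hp0 hpl hq0 hql hp0 hpl, ufUnion_find hg hp0 hpl hq0 hql hq0 hql]
  rcases le_total (ufFind par p) (ufFind par q) with h | h
  · rw [max_eq_right h, min_eq_left h]
    split <;> split <;> omega
  · rw [max_eq_left h, min_eq_right h]
    split <;> split <;> omega

-- ---- the union phase processed cell by cell ----

def buildStep (b : List (List Int)) (t : Int) (par : List Int) (c : Int × Int) : List Int :=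
  if bgetI b c.1 c.2 = t then
    let p := c.1 * (b.length : Int) + c.2
    let par1 := if c.2 + 1 < (b.length : Int) ∧ bgetI b c.1 (c.2 + 1) = t
      then ufUnion par p (p + 1) else par
    if c.1 + 1 < (b.length : Int) ∧ bgetI b (c.1 + 1) c.2 = t
      then ufUnion par1 p (p + (b.length : Int)) else par1
  else par

lemma ufBuild_eq (b : List (List Int)) (t : Int) :
    ufBuild b t = (raster (b.length : Int)).foldl (buildStep b t)
      (PySem.List.pyRange 0 ((b.length : Int) * (b.length : Int)) 1) :=
  foldl_double_pyRange (b.length : Int) (buildStep b t) _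

lemma Nsq_cast (b : List (List Int)) :
    ((b.length * b.length : Nat) : Int) = (b.length : Int) * (b.length : Int) := by push_cast; ring

lemma idx_ok {b : List (List Int)} {t : Int} {c : Int × Int} (h : Tgt b t c) :
    0 ≤ idxC (b.length : Int) c ∧ (idxC (b.length : Int) c).toNat < b.length * b.length := by
  obtain ⟨h1, h2, h3, h4, _⟩ := h
  have ha := idxC_nonneg h1 h3 h4
  have hb := idxC_lt h2 h4 h1
  have hc := Nsq_cast b
  omega

lemma tgt_of_raster {b : List (List Int)} {t : Int} {c : Int × Int}
    (hc : c ∈ raster (b.length : Int)) (hv : bgetI b c.1 c.2 = t) : Tgt b t c := by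
  obtain ⟨h1, h2, h3, h4⟩ := mem_raster.mp hc
  exact ⟨h1, h2, h3, h4, hv⟩

lemma idx_right {b : List (List Int)} (c : Int × Int) :
    idxC (b.length : Int) c + 1 = idxC (b.length : Int) (c.1, c.2 + 1) := by
  simp [idxC]; ring

lemma idx_down {b : List (List Int)} (c : Int × Int) :
    idxC (b.length : Int) c + (b.length : Int) = idxC (b.length : Int) (c.1 + 1, c.2) := by
  simp [idxC]; ring

lemma adj_right {b : List (List Int)} {t : Int} {c : Int × Int} (hc : Tgt b t c)
    (hr : Tgt b t (c.1, c.2 + 1)) : Adjc b t c (c.1, c.2 + 1) := ⟨hc, hr, by simp⟩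

lemma adj_down {b : List (List Int)} {t : Int} {c : Int × Int} (hc : Tgt b t c)
    (hr : Tgt b t (c.1 + 1, c.2)) : Adjc b t c (c.1 + 1, c.2) := ⟨hc, hr, by simp⟩

lemma cell_idx {b : List (List Int)} {t : Int} {c : Int × Int} (h : Tgt b t c) :
    cellOf (b.length : Int) (idxC (b.length : Int) c) = c :=
  cellOf_idxC h.1 h.2.2.1 h.2.2.2.1

lemma buildStep_good {b : List (List Int)} {t : Int} {par : List Int} {c : Int × Int}
    (hg : UFgood b t par) (hc : c ∈ raster (b.length : Int)) :
    UFgood b t (buildStep b t par c) := by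
  unfold buildStep
  dsimp only
  split
  · next hv =>
    have htc : Tgt b t c := tgt_of_raster hc hv
    have hokc := idx_ok htc
    have hg1 : UFgood b t (if c.2 + 1 < (b.length : Int) ∧ bgetI b c.1 (c.2 + 1) = t
        then ufUnion par (c.1 * (b.length : Int) + c.2) (c.1 * (b.length : Int) + c.2 + 1)
        else par) := by
      split
      · next hcond =>
        have htr : Tgt b t (c.1, c.2 + 1) :=
          ⟨htc.1, htc.2.1, by have := htc.2.2.1; omega, hcond.1, hcond.2⟩
        have hokr := idx_ok htr
        have he : c.1 * (b.length : Int) + c.2 = idxC (b.length : Int) c := rfl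
        rw [he, idx_right c]
        refine ufUnion_good hg hokc.1 (by rw [hg.1]; exact hokc.2) hokr.1
          (by rw [hg.1]; exact hokr.2) ?_
        rw [cell_idx htc, cell_idx htr]
        exact Relation.ReflTransGen.single (adj_right htc htr)
      · exact hg
    split
    · next hcond =>
      have htd : Tgt b t (c.1 + 1, c.2) :=
        ⟨by have := htc.1; omega, hcond.1, htc.2.2.1, htc.2.2.2.1, hcond.2⟩
      have hokd := idx_ok htd
      have he : c.1 * (b.length : Int) + c.2 = idxC (b.length : Int) c := rfl
      rw [he, idx_down c]
      refine ufUnion_good hg1 hokc.1 (by rw [hg1.1]; exact hokc.2) hokd.1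
        (by rw [hg1.1]; exact hokd.2) ?_
      rw [cell_idx htc, cell_idx htd]
      exact Relation.ReflTransGen.single (adj_down htc htd)
    · exact hg1
  · exact hg

-- after this cell has been processed, its right/down edges are joined
def edgeDone (b : List (List Int)) (t : Int) (par : List Int) (c : Int × Int) : Prop :=
  Tgt b t c →
    ((Tgt b t (c.1, c.2 + 1) →
        ufFind par (idxC (b.length : Int) c) = ufFind par (idxC (b.length : Int) (c.1, c.2 + 1))) ∧
     (Tgt b t (c.1 + 1, c.2) →
        ufFind par (idxC (b.length : Int) c) = ufFind par (idxC (b.length : Int) (c.1 + 1, c.2))))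

def findPres (b : List (List Int)) (par par' : List Int) : Prop :=
  ∀ i j : Int, 0 ≤ i → i.toNat < b.length * b.length → 0 ≤ j → j.toNat < b.length * b.length →
    ufFind par i = ufFind par j → ufFind par' i = ufFind par' j

lemma buildStep_master {b : List (List Int)} {t : Int} {par : List Int} {c : Int × Int}
    (hg : UFgood b t par) (hc : c ∈ raster (b.length : Int)) :
    findPres b par (buildStep b t par c) ∧ edgeDone b t (buildStep b t par c) c := by
  unfold buildStep
  dsimp only
  split
  · next hv =>
    have htc : Tgt b t c := tgt_of_raster hc hv
    have hokc := idx_ok htc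
    have hrIff : (c.2 + 1 < (b.length : Int) ∧ bgetI b c.1 (c.2 + 1) = t) ↔ Tgt b t (c.1, c.2 + 1) := by
      constructor
      · intro hcond
        exact ⟨htc.1, htc.2.1, by have := htc.2.2.1; omega, hcond.1, hcond.2⟩
      · intro hT
        exact ⟨hT.2.2.2.1, hT.2.2.2.2⟩
    have hdIff : (c.1 + 1 < (b.length : Int) ∧ bgetI b (c.1 + 1) c.2 = t) ↔ Tgt b t (c.1 + 1, c.2) := by
      constructor
      · intro hcond
        exact ⟨by have := htc.1; omega, hcond.1, htc.2.2.1, htc.2.2.2.1, hcond.2⟩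
      · intro hT
        exact ⟨hT.2.1, hT.2.2.2.2⟩
    have hpeq : c.1 * (b.length : Int) + c.2 = idxC (b.length : Int) c := rfl
    by_cases hR : c.2 + 1 < (b.length : Int) ∧ bgetI b c.1 (c.2 + 1) = t
    · have htr : Tgt b t (c.1, c.2 + 1) := hrIff.mp hR
      have hokr := idx_ok htr
      have hconnR : Conn b t (cellOf (b.length : Int) (idxC (b.length : Int) c))
          (cellOf (b.length : Int) (idxC (b.length : Int) c + 1)) := by
        rw [idx_right c, cell_idx htc, cell_idx htr]
        exact Relation.ReflTransGen.single (adj_right htc htr)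
      have hg1 : UFgood b t (ufUnion par (idxC (b.length : Int) c) (idxC (b.length : Int) c + 1)) := by
        refine ufUnion_good hg hokc.1 (by rw [hg.1]; exact hokc.2) (by omega) ?_ hconnR
        rw [idx_right c, hg.1]
        exact hokr.2
      have hpres1 : findPres b par (ufUnion par (idxC (b.length : Int) c) (idxC (b.length : Int) c + 1)) := by
        intro i j hi0 hil hj0 hjl h
        refine ufUnion_preserves hg hokc.1 (by rw [hg.1]; exact hokc.2) (by omega)
          (by rw [idx_right c, hg.1]; exact hokr.2) hi0 (by rw [hg.1]; exact hil) hj0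
          (by rw [hg.1]; exact hjl) h
      have hjoin1 : ufFind (ufUnion par (idxC (b.length : Int) c) (idxC (b.length : Int) c + 1))
          (idxC (b.length : Int) c)
          = ufFind (ufUnion par (idxC (b.length : Int) c) (idxC (b.length : Int) c + 1))
            (idxC (b.length : Int) c + 1) := by
        refine ufUnion_joins hg hokc.1 (by rw [hg.1]; exact hokc.2) (by omega) ?_
        rw [idx_right c, hg.1]
        exact hokr.2
      rw [if_pos hR, hpeq]
      by_cases hD : c.1 + 1 < (b.length : Int) ∧ bgetI b (c.1 + 1) c.2 = t
      · have htd : Tgt b t (c.1 + 1, c.2) := hdIff.mp hD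
        have hokd := idx_ok htd
        have hconnD : Conn b t (cellOf (b.length : Int) (idxC (b.length : Int) c))
            (cellOf (b.length : Int) (idxC (b.length : Int) c + (b.length : Int))) := by
          rw [idx_down c, cell_idx htc, cell_idx htd]
          exact Relation.ReflTransGen.single (adj_down htc htd)
        have hdl : (idxC (b.length : Int) c + (b.length : Int)).toNat
            < (ufUnion par (idxC (b.length : Int) c) (idxC (b.length : Int) c + 1)).length := by
          rw [ufUnion_length, hg.1, idx_down c]
          exact hokd.2
        have hpres2 : findPres b par
            (ufUnion (ufUnion par (idxC (b.length : Int) c) (idxC (b.length : Int) c + 1))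
              (idxC (b.length : Int) c) (idxC (b.length : Int) c + (b.length : Int))) := by
          intro i j hi0 hil hj0 hjl h
          refine ufUnion_preserves hg1 hokc.1
            (by rw [ufUnion_length, hg.1]; exact hokc.2) (by omega) hdl hi0
            (by rw [ufUnion_length, hg.1]; exact hil) hj0
            (by rw [ufUnion_length, hg.1]; exact hjl) (hpres1 i j hi0 hil hj0 hjl h)
        rw [if_pos hD]
        refine ⟨hpres2, fun _ => ⟨fun _ => ?_, fun _ => ?_⟩⟩
        · rw [← idx_right c]
          refine ufUnion_preserves hg1 hokc.1
            (by rw [ufUnion_length, hg.1]; exact hokc.2) (by omega) hdl hokc.1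
            (by rw [ufUnion_length, hg.1]; exact hokc.2) (by omega)
            (by rw [ufUnion_length, hg.1, idx_right c]; exact hokr.2) hjoin1
        · rw [← idx_down c]
          refine ufUnion_joins hg1 hokc.1
            (by rw [ufUnion_length, hg.1]; exact hokc.2) (by omega) hdl
      · rw [if_neg hD]
        refine ⟨hpres1, fun _ => ⟨fun _ => by rw [← idx_right c]; exact hjoin1, fun hTd => ?_⟩⟩
        exact absurd (hdIff.mpr hTd) hD
    · rw [if_neg hR]
      by_cases hD : c.1 + 1 < (b.length : Int) ∧ bgetI b (c.1 + 1) c.2 = t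
      · have htd : Tgt b t (c.1 + 1, c.2) := hdIff.mp hD
        have hokd := idx_ok htd
        rw [if_pos hD, hpeq]
        have hdl : (idxC (b.length : Int) c + (b.length : Int)).toNat < par.length := by
          rw [hg.1, idx_down c]
          exact hokd.2
        refine ⟨?_, fun _ => ⟨fun hTr => absurd (hrIff.mpr hTr) hR, fun _ => ?_⟩⟩
        · intro i j hi0 hil hj0 hjl h
          exact ufUnion_preserves hg hokc.1 (by rw [hg.1]; exact hokc.2) (by omega) hdl hi0
            (by rw [hg.1]; exact hil) hj0 (by rw [hg.1]; exact hjl) h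
        · rw [← idx_down c]
          exact ufUnion_joins hg hokc.1 (by rw [hg.1]; exact hokc.2) (by omega) hdl
      · rw [if_neg hD]
        exact ⟨fun i j _ _ _ _ h => h,
          fun _ => ⟨fun hTr => absurd (hrIff.mpr hTr) hR, fun hTd => absurd (hdIff.mpr hTd) hD⟩⟩
  · next hv =>
    exact ⟨fun i j _ _ _ _ h => h, fun hT => absurd hT.2.2.2.2 hv⟩

lemma edgeDone_pres {b : List (List Int)} {t : Int} {par par' : List Int} {c : Int × Int}
    (hp : findPres b par par') (he : edgeDone b t par c) : edgeDone b t par' c := by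
  intro hT
  obtain ⟨h1, h2⟩ := he hT
  have hokc := idx_ok hT
  constructor
  · intro hTr
    have hokr := idx_ok hTr
    exact hp _ _ hokc.1 hokc.2 hokr.1 hokr.2 (h1 hTr)
  · intro hTd
    have hokd := idx_ok hTd
    exact hp _ _ hokc.1 hokc.2 hokd.1 hokd.2 (h2 hTd)

lemma build_fold {b : List (List Int)} {t : Int} (P : List (Int × Int))
    (hP : ∀ c ∈ P, c ∈ raster (b.length : Int)) (par : List Int) (hg : UFgood b t par) :
    UFgood b t (P.foldl (buildStep b t) par) ∧ findPres b par (P.foldl (buildStep b t) par) ∧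
      ∀ c ∈ P, edgeDone b t (P.foldl (buildStep b t) par) c := by
  induction P generalizing par with
  | nil => exact ⟨hg, fun i j _ _ _ _ h => h, by simp⟩
  | cons c P ih =>
    have hcr : c ∈ raster (b.length : Int) := hP c List.mem_cons_self
    have hg1 : UFgood b t (buildStep b t par c) := buildStep_good hg hcr
    obtain ⟨hpres1, hedge1⟩ := buildStep_master hg hcr
    obtain ⟨ihg, ihpres, ihedge⟩ := ih (fun d hd => hP d (List.mem_cons_of_mem _ hd)) _ hg1
    rw [List.foldl_cons]
    refine ⟨ihg, fun i j hi0 hil hj0 hjl h => ihpres i j hi0 hil hj0 hjl (hpres1 i j hi0 hil hj0 hjl h), ?_⟩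
    intro d hd
    rcases List.mem_cons.mp hd with rfl | hd'
    · exact edgeDone_pres ihpres hedge1
    · exact ihedge d hd'

lemma init_good (b : List (List Int)) (t : Int) :
    UFgood b t (PySem.List.pyRange 0 ((b.length : Int) * (b.length : Int)) 1) := by
  have hre : PySem.List.pyRange 0 ((b.length : Int) * (b.length : Int)) 1
      = (List.range (b.length * b.length)).map Int.ofNat := by
    rw [← Nsq_cast b]
    exact PySem.List.pyRange_zero_natCast _
  have hlen : (PySem.List.pyRange 0 ((b.length : Int) * (b.length : Int)) 1).length
      = b.length * b.length := by rw [hre]; simp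
  have hget : ∀ k : Nat, k < b.length * b.length →
      (PySem.List.pyRange 0 ((b.length : Int) * (b.length : Int)) 1).getD k 0 = (k : Int) := by
    intro k hk
    rw [hre]
    simp [List.getD, hk]
  refine ⟨hlen, ?_, ?_⟩
  · intro k hk
    rw [hlen] at hk
    rw [hget k hk]
    omega
  · intro k hk hne
    rw [hlen] at hk
    rw [hget k hk] at hne
    omega

lemma ufBuild_master (b : List (List Int)) (t : Int) :
    UFgood b t (ufBuild b t) ∧
      ∀ c d : Int × Int, Adjc b t c d →
        ufFind (ufBuild b t) (idxC (b.length : Int) c)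
          = ufFind (ufBuild b t) (idxC (b.length : Int) d) := by
  rw [ufBuild_eq]
  obtain ⟨hgood, _, hedge⟩ := build_fold (raster (b.length : Int)) (fun c hc => hc) _ (init_good b t)
  refine ⟨hgood, ?_⟩
  rintro c d ⟨hc, hd, hcd⟩
  have hcm : c ∈ raster (b.length : Int) := mem_raster.mpr ⟨hc.1, hc.2.1, hc.2.2.1, hc.2.2.2.1⟩
  have hdm : d ∈ raster (b.length : Int) := mem_raster.mpr ⟨hd.1, hd.2.1, hd.2.2.1, hd.2.2.2.1⟩
  rcases hcd with ⟨h1, h2 | h2⟩ | ⟨h1, h2 | h2⟩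
  · have hde : d = (c.1, c.2 + 1) := by
      obtain ⟨dx, dy⟩ := d; simp_all
    subst hde
    exact (hedge c hcm hc).1 hd
  · have hce : c = (d.1, d.2 + 1) := by
      obtain ⟨cx, cy⟩ := c; obtain ⟨dx, dy⟩ := d; simp_all
    subst hce
    exact ((hedge d hdm hd).1 hc).symm
  · have hde : d = (c.1 + 1, c.2) := by
      obtain ⟨dx, dy⟩ := d; simp_all
    subst hde
    exact (hedge c hcm hc).2 hd
  · have hce : c = (d.1 + 1, d.2) := by
      obtain ⟨cx, cy⟩ := c; obtain ⟨dx, dy⟩ := d; simp_all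
    subst hce
    exact ((hedge d hdm hd).2 hc).symm

-- the union-find classes after the build phase are exactly the components
lemma ufBuild_conn_iff {b : List (List Int)} {t : Int} {c d : Int × Int}
    (hc : Tgt b t c) (hd : Tgt b t d) :
    (ufFind (ufBuild b t) (idxC (b.length : Int) c)
      = ufFind (ufBuild b t) (idxC (b.length : Int) d)) ↔ Conn b t c d := by
  obtain ⟨hgood, hadj⟩ := ufBuild_master b t
  constructor
  · intro h
    have hokc := idx_ok hc
    have hokd := idx_ok hd
    obtain ⟨_, _, _, hcc⟩ := ufFind_in_range hgood hokc.1 (by rw [hgood.1]; exact hokc.2)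
    obtain ⟨_, _, _, hdc⟩ := ufFind_in_range hgood hokd.1 (by rw [hgood.1]; exact hokd.2)
    rw [cell_idx hc] at hcc
    rw [cell_idx hd] at hdc
    rw [h] at hcc
    exact Conn_trans (Conn_symm b t hcc) hdc
  · intro h
    induction h with
    | refl => rfl
    | tail _ hstep ih => exact (ih hstep.1).trans (hadj _ _ hstep)

-- ---- B's grouping phase: buckets are the root-classes in raster order ----

def tcells (b : List (List Int)) (t : Int) : List (Int × Int) :=
  (raster (b.length : Int)).filter (fun c => decide (bgetI b c.1 c.2 = t))

def rootOf (b : List (List Int)) (t : Int) (c : Int × Int) : Int :=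
  ufFind (ufBuild b t) (idxC (b.length : Int) c)

lemma ufGroups_eq_fold (b : List (List Int)) (t : Int) (par : List Int) :
    ufGroups b t par = (tcells b t).foldl
      (fun d c => d.modify (ufFind par (idxC (b.length : Int) c)) [] (· ++ [c]))
      PySem.Dict.empty := by
  have h1 : ufGroups b t par = (raster (b.length : Int)).foldl
      (fun d c => if bgetI b c.1 c.2 = t
        then d.modify (ufFind par (idxC (b.length : Int) c)) [] (· ++ [c]) else d)
      PySem.Dict.empty := by
    unfold ufGroups
    exact foldl_double_pyRange (b.length : Int)
      (fun d c => if bgetI b c.1 c.2 = t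
        then d.modify (ufFind par (idxC (b.length : Int) c)) [] (· ++ [c]) else d)
      PySem.Dict.empty
  rw [h1, tcells, List.foldl_filter]
  congr 1
  funext d c
  by_cases h : bgetI b c.1 c.2 = t <;> simp [h]

lemma filter_map_pairs {α : Type} (l : List α) (k : α → Int) (r : Int) :
    (((l.map (fun c => (k c, c))).filter (fun p => p.1 == r)).map (fun p => p.2))
      = l.filter (fun c => k c == r) := by
  induction l with
  | nil => rfl
  | cons x xs ih =>
    by_cases h : k x == r <;> simp [h, ih]

lemma extractUF_eq (b : List (List Int)) (t : Int) :
    extractUF b t = (PySem.Set.ofList ((tcells b t).map (rootOf b t))).map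
      (fun r => (tcells b t).filter (fun c => rootOf b t c == r)) := by
  unfold extractUF
  rw [ufGroups_eq_fold]
  set l := tcells b t with hl
  set key := fun c => ufFind (ufBuild b t) (idxC (b.length : Int) c) with hkey
  have hkeys : (l.foldl (fun d c => d.modify (key c) [] (· ++ [c])) PySem.Dict.empty).keys
      = PySem.Set.ofList (l.map key) := by
    rw [PySem.Dict.keys_foldl_modify_key]
    rw [PySem.Dict.keys_empty, PySem.Set.update_nil_left]
  have hnodup : (l.foldl (fun d c => d.modify (key c) [] (· ++ [c])) PySem.Dict.empty).keys.Nodup :=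
    PySem.Dict.nodup_keys_foldl_modify_key l key [] _ _ PySem.Dict.nodup_keys_empty
  rw [PySem.Dict.values_eq_map_keys _ hnodup [], hkeys]
  apply List.map_congr_left
  intro r _
  have hfold : (l.map (fun c => (key c, c))).foldl (fun d p => d.modify p.1 [] (· ++ [p.2]))
        PySem.Dict.empty
      = l.foldl (fun d c => d.modify (key c) [] (· ++ [c])) PySem.Dict.empty := by
    rw [List.foldl_map]
  rw [← hfold, PySem.Dict.getD_foldl_modify_append, PySem.Dict.getD_empty, List.nil_append,
    filter_map_pairs]
  rfl

-- ---- A's BFS: the visited array ----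

def vDim (v : List (List Bool)) (n : Nat) : Prop := v.length = n ∧ ∀ r ∈ v, r.length = n

def vp (v : List (List Bool)) (c : Int × Int) : Prop := vget v c.1 c.2 = true

def InR (n : Int) (c : Int × Int) : Prop := 0 ≤ c.1 ∧ c.1 < n ∧ 0 ≤ c.2 ∧ c.2 < n

lemma getD_row_mem {v : List (List Bool)} {a : Nat} (h : a < v.length) : v.getD a [] ∈ v := by
  rw [List.getD_eq_getElem _ _ h]
  exact List.getElem_mem h

lemma vDim_vset {v : List (List Bool)} {n : Nat} (h : vDim v n) (x y : Int) :
    vDim (vset v x y) n := by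
  obtain ⟨h1, h2⟩ := h
  refine ⟨by simp [vset, h1], ?_⟩
  by_cases hx : x.toNat < v.length
  · intro r hr
    rcases List.mem_or_eq_of_mem_set hr with hmem | rfl
    · exact h2 r hmem
    · rw [List.length_set]
      exact h2 _ (getD_row_mem hx)
  · intro r hr
    rw [vset, List.set_eq_of_length_le (by omega)] at hr
    exact h2 r hr

lemma vget_vset_self {v : List (List Bool)} {n : Nat} (h : vDim v n) {x y : Int}
    (hx0 : 0 ≤ x) (hxn : x < (n : Int)) (hy0 : 0 ≤ y) (hyn : y < (n : Int)) :
    vget (vset v x y) x y = true := by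
  obtain ⟨h1, h2⟩ := h
  have hxl : x.toNat < v.length := by omega
  have hrow : (v.getD x.toNat []).length = n := h2 _ (getD_row_mem hxl)
  have hyl : y.toNat < (v.getD x.toNat []).length := by omega
  unfold vget vset
  rw [show (v.set x.toNat ((v.getD x.toNat []).set y.toNat true)).getD x.toNat []
      = (v.getD x.toNat []).set y.toNat true by simp [List.getD, hxl]]
  simp only [List.getD]
  rw [List.getElem?_set_self (by simpa using hyl)]
  rfl

lemma vget_vset_ne {v : List (List Bool)} {n : Nat} (h : vDim v n) {x y x' y' : Int}
    (hx0 : 0 ≤ x) (hxn : x < (n : Int)) (hy0 : 0 ≤ y) (_hyn : y < (n : Int))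
    (hx0' : 0 ≤ x') (_hxn' : x' < (n : Int)) (hy0' : 0 ≤ y') (_hyn' : y' < (n : Int))
    (hne : (x, y) ≠ (x', y')) :
    vget (vset v x y) x' y' = vget v x' y' := by
  obtain ⟨h1, h2⟩ := h
  have hxl : x.toNat < v.length := by omega
  have hne' : ¬(x = x' ∧ y = y') := by simpa [Prod.ext_iff] using hne
  by_cases hxx : x'.toNat = x.toNat
  · have hxe : x' = x := by omega
    have hyy : y.toNat ≠ y'.toNat := by omega
    unfold vget vset
    rw [hxe]
    rw [show (v.set x.toNat ((v.getD x.toNat []).set y.toNat true)).getD x.toNat []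
        = (v.getD x.toNat []).set y.toNat true by simp [List.getD, hxl]]
    simp only [List.getD]
    rw [List.getElem?_set_ne hyy]
  · unfold vget vset
    rw [show (v.set x.toNat ((v.getD x.toNat []).set y.toNat true)).getD x'.toNat []
        = v.getD x'.toNat [] by
      simp only [List.getD]
      rw [List.getElem?_set_ne (by omega : x.toNat ≠ x'.toNat)]]

lemma vget_init {n : Nat} {x y : Int} (hx0 : 0 ≤ x) (hxn : x < (n : Int)) (_hy0 : 0 ≤ y)
    (hyn : y < (n : Int)) :
    vget (List.replicate n (List.replicate n false)) x y = false := by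
  have hxl : x.toNat < n := by omega
  have hyl : y.toNat < n := by omega
  unfold vget
  rw [show (List.replicate n (List.replicate n false)).getD x.toNat [] = List.replicate n false by
    simp [List.getD, hxl]]
  simp [List.getD, hyl]

lemma vDim_init (n : Nat) : vDim (List.replicate n (List.replicate n false)) n := by
  constructor
  · simp
  · intro r hr
    rw [List.eq_of_mem_replicate hr]
    simp

-- invariant of the BFS working state while cell (x, y) is being expanded
def Mid (b : List (List Int)) (t : Int) (s : Int × Int) (v0 : List (List Bool)) (x y : Int)
    (σ : List (List Bool) × List (Int × Int) × List (Int × Int)) : Prop :=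
  vDim σ.1 b.length ∧
  (∀ z, InR (b.length : Int) z → (vp σ.1 z ↔ (vp v0 z ∨ z ∈ σ.2.2))) ∧
  σ.2.2.Nodup ∧
  (∀ z ∈ σ.2.2, ¬ vp v0 z) ∧
  (∀ z ∈ σ.2.1, z ∈ σ.2.2) ∧
  (∀ z ∈ σ.2.2, Tgt b t z ∧ Conn b t s z) ∧
  (∀ z ∈ σ.2.2, z ∉ σ.2.1 → z ≠ (x, y) → ∀ d, Adjc b t z d → vp σ.1 d) ∧
  (x, y) ∈ σ.2.2

lemma tgt_inR {b : List (List Int)} {t : Int} {c : Int × Int} (h : Tgt b t c) :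
    InR (b.length : Int) c := ⟨h.1, h.2.1, h.2.2.1, h.2.2.2.1⟩

lemma adj_dir {b : List (List Int)} {t : Int} {x y : Int} (hT : Tgt b t (x, y)) {k : Int}
    (hk : k = 0 ∨ k = 1 ∨ k = 2 ∨ k = 3)
    (hTd : Tgt b t (x + PySem.List.pyGetD dxL k 0, y + PySem.List.pyGetD dyL k 0)) :
    Adjc b t (x, y) (x + PySem.List.pyGetD dxL k 0, y + PySem.List.pyGetD dyL k 0) := by
  rcases hk with rfl | rfl | rfl | rfl <;>
    exact ⟨hT, hTd, by simp [dxL, dyL, PySem.List.pyGetD, PySem.List.pyGet?, PySem.List.pyIdx?]⟩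

lemma adj_is_dir {b : List (List Int)} {t : Int} {c d : Int × Int} (h : Adjc b t c d) :
    ∃ k : Int, (k = 0 ∨ k = 1 ∨ k = 2 ∨ k = 3) ∧
      d = (c.1 + PySem.List.pyGetD dxL k 0, c.2 + PySem.List.pyGetD dyL k 0) := by
  obtain ⟨_, _, hg⟩ := h
  obtain ⟨cx, cy⟩ := c
  obtain ⟨dx, dy⟩ := d
  simp only [Prod.mk.injEq]
  rcases hg with ⟨h1, h2 | h2⟩ | ⟨h1, h2 | h2⟩
  · exact ⟨2, by norm_num, by simp [dxL, dyL, PySem.List.pyGetD, PySem.List.pyGet?, PySem.List.pyIdx?] at *; omega⟩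
  · exact ⟨3, by norm_num, by simp [dxL, dyL, PySem.List.pyGetD, PySem.List.pyGet?, PySem.List.pyIdx?] at *; omega⟩
  · exact ⟨0, by norm_num, by simp [dxL, dyL, PySem.List.pyGetD, PySem.List.pyGet?, PySem.List.pyIdx?] at *; omega⟩
  · exact ⟨1, by norm_num, by simp [dxL, dyL, PySem.List.pyGetD, PySem.List.pyGet?, PySem.List.pyIdx?] at *; omega⟩

lemma bfsStep_mid {b : List (List Int)} {t : Int} {s : Int × Int} {v0 : List (List Bool)}
    {x y : Int} {σ : List (List Bool) × List (Int × Int) × List (Int × Int)} {k : Int}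
    (hk : k = 0 ∨ k = 1 ∨ k = 2 ∨ k = 3) (hσ : Mid b t s v0 x y σ) :
    Mid b t s v0 x y (bfsStep b t (b.length : Int) x y σ k) ∧
    (∀ z, InR (b.length : Int) z → vp σ.1 z → vp (bfsStep b t (b.length : Int) x y σ k).1 z) ∧
    (∀ z ∈ σ.2.2, z ∈ (bfsStep b t (b.length : Int) x y σ k).2.2) ∧
    (Adjc b t (x, y) (x + PySem.List.pyGetD dxL k 0, y + PySem.List.pyGetD dyL k 0) →
      vp (bfsStep b t (b.length : Int) x y σ k).1
        (x + PySem.List.pyGetD dxL k 0, y + PySem.List.pyGetD dyL k 0)) := by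
  obtain ⟨hdim, hI1, hnd, hV0, hqc, hconn, hclo, hxy⟩ := hσ
  set nx := x + PySem.List.pyGetD dxL k 0 with hnx
  set ny := y + PySem.List.pyGetD dyL k 0 with hny
  unfold bfsStep
  rw [← hnx, ← hny]
  dsimp only
  split
  · next hcond =>
    obtain ⟨c1, c2, c3, c4, c5, c6⟩ := hcond
    have hTd : Tgt b t (nx, ny) := ⟨c1, c2, c3, c4, c6⟩
    have hInRd : InR (b.length : Int) (nx, ny) := ⟨c1, c2, c3, c4⟩
    have hnvp : ¬ vp σ.1 (nx, ny) := by
      simp [vp, c5]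
    have hnm : (nx, ny) ∉ σ.2.2 := fun hm => hnvp ((hI1 _ hInRd).mpr (Or.inr hm))
    have hnv0 : ¬ vp v0 (nx, ny) := fun hm => hnvp ((hI1 _ hInRd).mpr (Or.inl hm))
    have hTxy : Tgt b t (x, y) := (hconn _ hxy).1
    have hAdj : Adjc b t (x, y) (nx, ny) := adj_dir hTxy hk hTd
    have hmono : ∀ z, InR (b.length : Int) z → vp σ.1 z → vp (vset σ.1 nx ny) z := by
      intro z hz hvz
      by_cases hze : z = (nx, ny)
      · subst hze
        exact absurd hvz hnvp
      · unfold vp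
        rw [vget_vset_ne hdim c1 c2 c3 c4 hz.1 hz.2.1 hz.2.2.1 hz.2.2.2
          (by intro hc; exact hze (by obtain ⟨z1, z2⟩ := z; simpa [Prod.ext_iff] using hc.symm))]
        exact hvz
    have hself : vp (vset σ.1 nx ny) (nx, ny) := vget_vset_self hdim c1 c2 c3 c4
    refine ⟨⟨vDim_vset hdim nx ny, ?_, ?_, ?_, ?_, ?_, ?_, ?_⟩, hmono, ?_, fun _ => hself⟩
    · intro z hz
      by_cases hze : z = (nx, ny)
      · subst hze
        simp only [List.mem_append, List.mem_singleton]
        exact ⟨fun _ => by simp, fun _ => hself⟩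
      · unfold vp
        rw [vget_vset_ne hdim c1 c2 c3 c4 hz.1 hz.2.1 hz.2.2.1 hz.2.2.2
          (by intro hc; exact hze (by obtain ⟨z1, z2⟩ := z; simpa [Prod.ext_iff] using hc.symm))]
        rw [show vget σ.1 z.1 z.2 = true ↔ vp σ.1 z from Iff.rfl, hI1 z hz]
        simp only [List.mem_append, List.mem_singleton]
        constructor
        · rintro (h | h)
          · exact Or.inl h
          · exact Or.inr (Or.inl h)
        · rintro (h | h | h)
          · exact Or.inl h
          · exact Or.inr h
          · exact absurd h hze
    · exact List.Nodup.append hnd (List.nodup_singleton _) (by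
        intro a ha hb
        rw [List.mem_singleton] at hb
        subst hb
        exact hnm ha)
    · intro z hz
      rcases List.mem_append.mp hz with h | h
      · exact hV0 z h
      · rw [List.mem_singleton] at h
        subst h
        exact hnv0
    · intro z hz
      rcases List.mem_append.mp hz with h | h
      · exact List.mem_append_left _ (hqc z h)
      · exact List.mem_append_right _ h
    · intro z hz
      rcases List.mem_append.mp hz with h | h
      · exact hconn z h
      · rw [List.mem_singleton] at h
        subst h
        exact ⟨hTd, Conn_trans (hconn _ hxy).2 (Relation.ReflTransGen.single hAdj)⟩
    · intro z hz hzq hzxy d hd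
      have hzc : z ∈ σ.2.2 := by
        rcases List.mem_append.mp hz with h | h
        · exact h
        · rw [List.mem_singleton] at h
          exact absurd (List.mem_append_right _ (h ▸ List.mem_singleton_self _)) (h ▸ hzq)
      have hzq' : z ∉ σ.2.1 := fun hm => hzq (List.mem_append_left _ hm)
      exact hmono d (tgt_inR hd.2.1) (hclo z hzc hzq' hzxy d hd)
    · exact List.mem_append_left _ hxy
    · intro z hz
      exact List.mem_append_left _ hz
  · next hcond =>
    refine ⟨⟨hdim, hI1, hnd, hV0, hqc, hconn, hclo, hxy⟩, fun z _ h => h, fun z h => h, ?_⟩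
    intro hAdj
    have hTd := hAdj.2.1
    have hInRd := tgt_inR hTd
    have : ¬ vget σ.1 nx ny = false := by
      intro hf
      exact hcond ⟨hInRd.1, hInRd.2.1, hInRd.2.2.1, hInRd.2.2.2, hf, hTd.2.2.2.2⟩
    unfold vp
    simpa using this

lemma bfsFold_mid {b : List (List Int)} {t : Int} {s : Int × Int} {v0 : List (List Bool)}
    {x y : Int} {v : List (List Bool)} {qt c : List (Int × Int)}
    (hσ : Mid b t s v0 x y (v, qt, c)) :
    Mid b t s v0 x y ((PySem.List.pyRange 0 4 1).foldl (bfsStep b t (b.length : Int) x y) (v, qt, c)) ∧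
    (∀ z ∈ c, z ∈ ((PySem.List.pyRange 0 4 1).foldl (bfsStep b t (b.length : Int) x y) (v, qt, c)).2.2) ∧
    (∀ d, Adjc b t (x, y) d →
      vp ((PySem.List.pyRange 0 4 1).foldl (bfsStep b t (b.length : Int) x y) (v, qt, c)).1 d) := by
  rw [show (PySem.List.pyRange 0 4 1) = [0, 1, 2, 3] by decide]
  simp only [List.foldl_cons, List.foldl_nil]
  have h0 := bfsStep_mid (k := 0) (by norm_num) hσ
  have h1 := bfsStep_mid (k := 1) (by norm_num) h0.1
  have h2 := bfsStep_mid (k := 2) (by norm_num) h1.1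
  have h3 := bfsStep_mid (k := 3) (by norm_num) h2.1
  refine ⟨h3.1, ?_, ?_⟩
  · intro z hz
    exact h3.2.2.1 _ (h2.2.2.1 _ (h1.2.2.1 _ (h0.2.2.1 _ hz)))
  · intro d hd
    obtain ⟨k, hk, rfl⟩ := adj_is_dir hd
    have hInRd := tgt_inR hd.2.1
    rcases hk with rfl | rfl | rfl | rfl
    · exact h3.2.1 _ hInRd (h2.2.1 _ hInRd (h1.2.1 _ hInRd (h0.2.2.2 hd)))
    · exact h3.2.1 _ hInRd (h2.2.1 _ hInRd (h1.2.2.2 hd))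
    · exact h3.2.1 _ hInRd (h2.2.2.2 hd)
    · exact h3.2.2.2 hd

-- invariant of the whole BFS loop state
def BfsInv (b : List (List Int)) (t : Int) (s : Int × Int) (v0 : List (List Bool))
    (v : List (List Bool)) (q c : List (Int × Int)) : Prop :=
  vDim v b.length ∧
  (∀ z, InR (b.length : Int) z → (vp v z ↔ (vp v0 z ∨ z ∈ c))) ∧
  c.Nodup ∧
  (∀ z ∈ c, ¬ vp v0 z) ∧
  (∀ z ∈ q, z ∈ c) ∧
  (∀ z ∈ c, Tgt b t z ∧ Conn b t s z) ∧
  (∀ z ∈ c, z ∉ q → ∀ d, Adjc b t z d → vp v d)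

lemma bfsLoop_spec {b : List (List Int)} {t : Int} {s : Int × Int} {v0 : List (List Bool)} :
    ∀ (v : List (List Bool)) (q c : List (Int × Int)), BfsInv b t s v0 v q c →
      BfsInv b t s v0 (bfsLoop b t (b.length : Int) v q c).1 []
        (bfsLoop b t (b.length : Int) v q c).2 ∧
      ∀ z ∈ c, z ∈ (bfsLoop b t (b.length : Int) v q c).2 := by
  intro v q c
  induction v, q, c using bfsLoop.induct b t (b.length : Int) with
  | case1 v c =>
    intro hinv
    rw [bfsLoop]
    exact ⟨hinv, fun z hz => hz⟩
  | case2 v c x y qt σ ih =>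
    intro hinv
    obtain ⟨hdim, hI1, hnd, hV0, hqc, hconn, hclo⟩ := hinv
    have hxy : (x, y) ∈ c := hqc _ List.mem_cons_self
    have hmid : Mid b t s v0 x y (v, qt, c) :=
      ⟨hdim, hI1, hnd, hV0, fun z hz => hqc z (List.mem_cons_of_mem _ hz), hconn,
        fun z hz hq hxy' d hd =>
          hclo z hz (by simp [List.mem_cons, hq, hxy']) d hd, hxy⟩
    obtain ⟨hm4, hsub4, hdir4⟩ := bfsFold_mid hmid
    have hinv' : BfsInv b t s v0
        ((PySem.List.pyRange 0 4 1).foldl (bfsStep b t (b.length : Int) x y) (v, qt, c)).1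
        ((PySem.List.pyRange 0 4 1).foldl (bfsStep b t (b.length : Int) x y) (v, qt, c)).2.1
        ((PySem.List.pyRange 0 4 1).foldl (bfsStep b t (b.length : Int) x y) (v, qt, c)).2.2 := by
      obtain ⟨g1, g2, g3, g4, g5, g6, g7, g8⟩ := hm4
      refine ⟨g1, g2, g3, g4, g5, g6, ?_⟩
      intro z hz hq d hd
      by_cases hze : z = (x, y)
      · subst hze
        exact hdir4 d hd
      · exact g7 z hz hq hze d hd
    obtain ⟨hfin, hsub⟩ := ih hinv'
    rw [bfsLoop]
    exact ⟨hfin, fun z hz => hsub _ (hsub4 z hz)⟩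

lemma pair_ne {z s : Int × Int} (h : z ≠ s) : (s.1, s.2) ≠ (z.1, z.2) := by
  intro hc
  apply h
  have h1 : s.1 = z.1 := congrArg Prod.fst hc
  have h2 : s.2 = z.2 := congrArg Prod.snd hc
  exact Prod.ext_iff.mpr ⟨h1.symm, h2.symm⟩

lemma closed_conn {b : List (List Int)} {t : Int} {v0 : List (List Bool)}
    (hC : ∀ z, InR (b.length : Int) z → vp v0 z → ∀ d, Adjc b t z d → vp v0 d)
    {z w : Int × Int} (h : Conn b t z w) (hz : vp v0 z) : vp v0 w := by
  induction h with
  | refl => exact hz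
  | tail hprev hstep ih => exact hC _ (tgt_inR hstep.1) ih _ hstep

-- one BFS run from an unvisited target cell collects exactly its component
lemma bfs_run {b : List (List Int)} {t : Int} {s : Int × Int} {v0 : List (List Bool)}
    (hdim : vDim v0 b.length)
    (hC : ∀ z, InR (b.length : Int) z → vp v0 z → ∀ d, Adjc b t z d → vp v0 d)
    (hTs : Tgt b t s) (hus : ¬ vp v0 s) :
    (bfsLoop b t (b.length : Int) (vset v0 s.1 s.2) [s] [s]).2.Nodup ∧
    (∀ x, x ∈ (bfsLoop b t (b.length : Int) (vset v0 s.1 s.2) [s] [s]).2 ↔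
      (Tgt b t x ∧ Conn b t s x)) ∧
    vDim (bfsLoop b t (b.length : Int) (vset v0 s.1 s.2) [s] [s]).1 b.length ∧
    (∀ z, InR (b.length : Int) z →
      (vp (bfsLoop b t (b.length : Int) (vset v0 s.1 s.2) [s] [s]).1 z ↔
        (vp v0 z ∨ (Tgt b t z ∧ Conn b t s z)))) := by
  have hsIn := tgt_inR hTs
  have hinit : BfsInv b t s v0 (vset v0 s.1 s.2) [s] [s] := by
    refine ⟨vDim_vset hdim _ _, ?_, List.nodup_singleton _, ?_, fun z hz => hz, ?_, ?_⟩
    · intro z hz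
      by_cases hze : z = s
      · subst hze
        simp only [List.mem_singleton]
        exact ⟨fun _ => by simp,
          fun _ => vget_vset_self hdim hsIn.1 hsIn.2.1 hsIn.2.2.1 hsIn.2.2.2⟩
      · unfold vp
        rw [vget_vset_ne hdim hsIn.1 hsIn.2.1 hsIn.2.2.1 hsIn.2.2.2 hz.1 hz.2.1 hz.2.2.1
          hz.2.2.2 (pair_ne hze)]
        simp only [List.mem_singleton, hze, or_false]
    · intro z hz
      rw [List.mem_singleton] at hz
      subst hz
      exact hus
    · intro z hz
      rw [List.mem_singleton] at hz
      subst hz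
      exact ⟨hTs, Conn_refl _ _ _⟩
    · intro z hz hq
      rw [List.mem_singleton] at hz
      exact absurd (hz ▸ List.mem_singleton_self _) hq
  obtain ⟨⟨fdim, fI1, fnd, fV0, _, fconn, fclo⟩, fsub⟩ := bfsLoop_spec _ _ _ hinit
  have hsmem : s ∈ (bfsLoop b t (b.length : Int) (vset v0 s.1 s.2) [s] [s]).2 :=
    fsub s (List.mem_singleton_self _)
  have hmem : ∀ x, x ∈ (bfsLoop b t (b.length : Int) (vset v0 s.1 s.2) [s] [s]).2 ↔
      (Tgt b t x ∧ Conn b t s x) := by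
    intro x
    constructor
    · exact fconn x
    · rintro ⟨hTx, hCx⟩
      clear hTx
      induction hCx with
      | refl => exact hsmem
      | tail hprev hstep ih =>
        have hvp := fclo _ ih (List.not_mem_nil) _ hstep
        rcases (fI1 _ (tgt_inR hstep.2.1)).mp hvp with h | h
        · exfalso
          have : vp v0 s := closed_conn hC
            (Conn_symm b t (Conn_trans hprev (Relation.ReflTransGen.single hstep))) h
          exact hus this
        · exact h
  refine ⟨fnd, hmem, fdim, ?_⟩
  intro z hz
  rw [fI1 z hz, hmem z]

-- ---- A's outer scan over the raster ----

def extStep (b : List (List Int)) (t : Int) (st : List (List Bool) × List (List (Int × Int)))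
    (c : Int × Int) : List (List Bool) × List (List (Int × Int)) :=
  if vget st.1 c.1 c.2 = false ∧ bgetI b c.1 c.2 = t then
    let r := bfsLoop b t (b.length : Int) (vset st.1 c.1 c.2) [c] [c]
    (r.1, st.2 ++ [r.2])
  else st

lemma bfsExtract_eq (b : List (List Int)) (t : Int) :
    bfsExtract b t = ((raster (b.length : Int)).foldl (extStep b t)
      (List.replicate b.length (List.replicate b.length false),
        ([] : List (List (Int × Int))))).2 := by
  unfold bfsExtract
  exact congrArg Prod.snd (foldl_double_pyRange (b.length : Int) (extStep b t) _)

-- invariant of the outer scan: visited is the union of the components met so far,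
-- and the emitted shapes enumerate one component per representative
def OInv (b : List (List Int)) (t : Int) (P : List (Int × Int))
    (st : List (List Bool) × List (List (Int × Int))) : Prop :=
  vDim st.1 b.length ∧
  (∀ z, InR (b.length : Int) z →
    (vp st.1 z ↔ ∃ p ∈ P, Tgt b t p ∧ Conn b t p z)) ∧
  ∃ reps : List (Int × Int),
    (∀ p ∈ reps, Tgt b t p ∧ p ∈ P) ∧
    PySem.Set.ofList ((P.filter (fun c => decide (bgetI b c.1 c.2 = t))).map (rootOf b t))
      = reps.map (rootOf b t) ∧
    List.Forall₂ (fun p sh => sh.Nodup ∧ ∀ x, x ∈ sh ↔ (Tgt b t x ∧ Conn b t p x)) reps st.2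

lemma conn_root {b : List (List Int)} {t : Int} {c d : Int × Int} (hc : Tgt b t c)
    (hd : Tgt b t d) : rootOf b t c = rootOf b t d ↔ Conn b t c d :=
  ufBuild_conn_iff hc hd

lemma extStep_inv {b : List (List Int)} {t : Int} {P : List (Int × Int)}
    {st : List (List Bool) × List (List (Int × Int))} {c : Int × Int}
    (hc : c ∈ raster (b.length : Int)) (h : OInv b t P st) :
    OInv b t (P ++ [c]) (extStep b t st c) := by
  obtain ⟨hdim, hI1, reps, hreps, hset, hfa⟩ := h
  have hcr := mem_raster.mp hc
  have hCl : ∀ z, InR (b.length : Int) z → vp st.1 z → ∀ d, Adjc b t z d → vp st.1 d := by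
    intro z hz hvz d hd
    obtain ⟨p, hp, hTp, hCp⟩ := (hI1 z hz).mp hvz
    exact (hI1 d (tgt_inR hd.2.1)).mpr
      ⟨p, hp, hTp, Conn_trans hCp (Relation.ReflTransGen.single hd)⟩
  unfold extStep
  split
  · next hg =>
    have hTc : Tgt b t c := ⟨hcr.1, hcr.2.1, hcr.2.2.1, hcr.2.2.2, hg.2⟩
    have huv : ¬ vp st.1 c := by
      unfold vp
      simp [hg.1]
    obtain ⟨rnd, rmem, rdim, rI1⟩ := bfs_run hdim hCl hTc huv
    refine ⟨rdim, ?_, reps ++ [c], ?_, ?_, ?_⟩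
    · intro z hz
      rw [rI1 z hz]
      constructor
      · rintro (hv | ⟨hTz, hCz⟩)
        · obtain ⟨p, hp, h1, h2⟩ := (hI1 z hz).mp hv
          exact ⟨p, List.mem_append_left _ hp, h1, h2⟩
        · exact ⟨c, List.mem_append_right _ (List.mem_singleton_self _), hTc, hCz⟩
      · rintro ⟨p, hp, hTp, hCp⟩
        rcases List.mem_append.mp hp with hp' | hp'
        · exact Or.inl ((hI1 z hz).mpr ⟨p, hp', hTp, hCp⟩)
        · rw [List.mem_singleton] at hp'
          subst hp'
          exact Or.inr ⟨Conn_tgt_right hCp hTp, hCp⟩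
    · intro p hp
      rcases List.mem_append.mp hp with hp' | hp'
      · exact ⟨(hreps p hp').1, List.mem_append_left _ (hreps p hp').2⟩
      · rw [List.mem_singleton] at hp'
        subst hp'
        exact ⟨hTc, List.mem_append_right _ (List.mem_singleton_self _)⟩
    · rw [List.filter_append]
      rw [show List.filter (fun c => decide (bgetI b c.1 c.2 = t)) [c] = [c] by
        simp [hg.2]]
      rw [List.map_append]
      simp only [List.map_cons, List.map_nil]
      rw [PySem.Set.ofList_append_singleton, hset, List.map_append]
      simp only [List.map_cons, List.map_nil]
      rw [PySem.Set.add_of_not_mem]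
      intro hmem
      rw [List.mem_map] at hmem
      obtain ⟨p, hp, hroot⟩ := hmem
      have hTp := (hreps p hp).1
      have hCpc : Conn b t p c := (conn_root hTp hTc).mp hroot
      exact huv ((hI1 c (tgt_inR hTc)).mpr ⟨p, (hreps p hp).2, hTp, hCpc⟩)
    · exact List.rel_append hfa (List.forall₂_cons.mpr ⟨⟨rnd, rmem⟩, List.Forall₂.nil⟩)
  · next hg =>
    by_cases hv : bgetI b c.1 c.2 = t
    · have hTc : Tgt b t c := ⟨hcr.1, hcr.2.1, hcr.2.2.1, hcr.2.2.2, hv⟩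
      have hvp : vp st.1 c := by
        unfold vp
        rcases Bool.eq_false_or_eq_true (vget st.1 c.1 c.2) with hf | ht
        · exact hf
        · exact absurd ⟨ht, hv⟩ hg
      obtain ⟨p0, hp0, hTp0, hCp0⟩ := (hI1 c (tgt_inR hTc)).mp hvp
      refine ⟨hdim, ?_, reps, ?_, ?_, hfa⟩
      · intro z hz
        rw [hI1 z hz]
        constructor
        · rintro ⟨p, hp, h1, h2⟩
          exact ⟨p, List.mem_append_left _ hp, h1, h2⟩
        · rintro ⟨p, hp, hTp, hCp⟩
          rcases List.mem_append.mp hp with hp' | hp'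
          · exact ⟨p, hp', hTp, hCp⟩
          · rw [List.mem_singleton] at hp'
            subst hp'
            exact ⟨p0, hp0, hTp0, Conn_trans hCp0 hCp⟩
      · intro p hp
        exact ⟨(hreps p hp).1, List.mem_append_left _ (hreps p hp).2⟩
      · rw [List.filter_append]
        rw [show List.filter (fun c => decide (bgetI b c.1 c.2 = t)) [c] = [c] by
          simp [hv]]
        rw [List.map_append]
        simp only [List.map_cons, List.map_nil]
        rw [PySem.Set.ofList_append_singleton, hset]
        apply PySem.Set.add_of_mem
        rw [← hset, PySem.Set.mem_ofList, List.mem_map]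
        refine ⟨p0, ?_, (conn_root hTp0 hTc).mpr hCp0⟩
        rw [List.mem_filter]
        exact ⟨hp0, by simp [hTp0.2.2.2.2]⟩
    · refine ⟨hdim, ?_, reps, ?_, ?_, hfa⟩
      · intro z hz
        rw [hI1 z hz]
        constructor
        · rintro ⟨p, hp, h1, h2⟩
          exact ⟨p, List.mem_append_left _ hp, h1, h2⟩
        · rintro ⟨p, hp, hTp, hCp⟩
          rcases List.mem_append.mp hp with hp' | hp'
          · exact ⟨p, hp', hTp, hCp⟩
          · rw [List.mem_singleton] at hp'
            subst hp'
            exact absurd hTp.2.2.2.2 hv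
      · intro p hp
        exact ⟨(hreps p hp).1, List.mem_append_left _ (hreps p hp).2⟩
      · rw [List.filter_append]
        rw [show List.filter (fun c => decide (bgetI b c.1 c.2 = t)) [c] = [] by
          simp [hv]]
        rw [List.append_nil]
        exact hset

lemma outer_fold {b : List (List Int)} {t : Int} (L : List (Int × Int)) :
    ∀ (P : List (Int × Int)) (st : List (List Bool) × List (List (Int × Int))),
      (∀ c ∈ L, c ∈ raster (b.length : Int)) → OInv b t P st →
      OInv b t (P ++ L) (L.foldl (extStep b t) st) := by
  induction L with
  | nil =>
    intro P st _ h
    simpa using h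
  | cons c L ih =>
    intro P st hL h
    rw [List.foldl_cons, show P ++ c :: L = (P ++ [c]) ++ L by simp]
    exact ih (P ++ [c]) _ (fun d hd => hL d (List.mem_cons_of_mem _ hd))
      (extStep_inv (hL c List.mem_cons_self) h)

lemma forall₂_imp_mem {α β : Type} {R S : α → β → Prop} :
    ∀ {l1 : List α} {l2 : List β}, (∀ a ∈ l1, ∀ b, R a b → S a b) →
      List.Forall₂ R l1 l2 → List.Forall₂ S l1 l2 := by
  intro l1 l2 h hf
  induction hf with
  | nil => exact List.Forall₂.nil
  | cons hab htl ih =>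
    exact List.Forall₂.cons (h _ List.mem_cons_self _ hab)
      (ih (fun a ha b hr => h a (List.mem_cons_of_mem _ ha) b hr))

-- A's result: one shape per component representative, in raster-first order
lemma bfs_forall2 (b : List (List Int)) (t : Int) :
    List.Forall₂ (fun r sh => sh.Nodup ∧ ∀ x, x ∈ sh ↔ (Tgt b t x ∧ rootOf b t x = r))
      (PySem.Set.ofList ((tcells b t).map (rootOf b t))) (bfsExtract b t) := by
  have hinit : OInv b t []
      (List.replicate b.length (List.replicate b.length false), ([] : List (List (Int × Int)))) := by
    refine ⟨vDim_init _, ?_, [], by simp, by simp, List.Forall₂.nil⟩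
    intro z hz
    simp only [List.not_mem_nil, false_and, exists_false, iff_false, ]
    unfold vp
    rw [vget_init hz.1 hz.2.1 hz.2.2.1 hz.2.2.2]
    simp
  have hfin := outer_fold (raster (b.length : Int)) [] _ (fun c hc => hc) hinit
  rw [List.nil_append] at hfin
  obtain ⟨_, _, reps, hreps, hset, hfa⟩ := hfin
  rw [bfsExtract_eq, show (raster (b.length : Int)).filter (fun c => decide (bgetI b c.1 c.2 = t))
      = tcells b t from rfl] at *
  rw [hset, List.forall₂_map_left_iff]
  refine forall₂_imp_mem ?_ hfa
  intro p hp sh hR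
  have hTp := (hreps p hp).1
  refine ⟨hR.1, fun x => ?_⟩
  rw [hR.2 x]
  constructor
  · rintro ⟨hTx, hCx⟩
    exact ⟨hTx, ((conn_root hTp hTx).mpr hCx).symm⟩
  · rintro ⟨hTx, hrt⟩
    exact ⟨hTx, (conn_root hTp hTx).mp hrt.symm⟩

-- ---- canonical key: invariance under permutation, and B's closed-form rotations ----

lemma min_id_eq_of_perm (xs ys : List Int) (hp : xs.Perm ys) :
    PySem.List.min? xs (fun v => v) = PySem.List.min? ys (fun v => v) := by
  cases hxs : PySem.List.min? xs (fun v => v) with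
  | none =>
    rw [PySem.List.min?_eq_none_iff] at hxs
    subst hxs
    rw [List.nil_perm.mp hp]
    simp [PySem.List.min?]
  | some m =>
    cases hys : PySem.List.min? ys (fun v => v) with
    | none =>
      rw [PySem.List.min?_eq_none_iff] at hys
      subst hys
      rw [List.perm_nil.mp hp] at hxs
      simp [PySem.List.min?] at hxs
    | some m' =>
      have h1 := PySem.List.min?_mem hxs
      have h2 := PySem.List.min?_mem hys
      have h3 := PySem.List.min?_isMin hxs
      have h4 := PySem.List.min?_isMin hys
      have e1 : m ≤ m' := h3 m' (hp.mem_iff.mpr h2)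
      have e2 : m' ≤ m := h4 m (hp.mem_iff.mp h1)
      have : m = m' := le_antisymm e1 e2
      rw [this]

lemma min_id_shift (xs : List Int) (a : Int) (h : xs ≠ []) :
    (PySem.List.min? (xs.map (fun v => v + a)) (fun v => v)).getD 0
      = (PySem.List.min? xs (fun v => v)).getD 0 + a := by
  cases hxs : PySem.List.min? xs (fun v => v) with
  | none => rw [PySem.List.min?_eq_none_iff] at hxs; exact absurd hxs h
  | some m =>
    cases hys : PySem.List.min? (xs.map (fun v => v + a)) (fun v => v) with
    | none =>
      rw [PySem.List.min?_eq_none_iff, List.map_eq_nil_iff] at hys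
      exact absurd hys h
    | some m' =>
      have h1 := PySem.List.min?_mem hxs
      have h2 := PySem.List.min?_mem hys
      have h3 := PySem.List.min?_isMin hxs
      have h4 := PySem.List.min?_isMin hys
      simp only [List.mem_map] at h2
      obtain ⟨x, hx, rfl⟩ := h2
      have e1 : m ≤ x := h3 x hx
      have e2 : x + a ≤ m + a := h4 (m + a) (List.mem_map.mpr ⟨m, h1, rfl⟩)
      simp only [Option.getD_some]
      omega

lemma normShape_perm (cs ds : List (Int × Int)) (hp : cs.Perm ds) :
    normShape cs = normShape ds := by
  unfold normShape
  dsimp only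
  rw [min_id_eq_of_perm _ _ (hp.map (fun p => p.1)),
      min_id_eq_of_perm _ _ (hp.map (fun p => p.2))]
  exact PySem.List.sorted_eq_sorted_of_perm _ _ _ (Equiv.injective toLex) (hp.map _)

lemma canonical_perm {cs ds : List (Int × Int)} (hp : cs.Perm ds) :
    canonical cs = canonical ds := by
  unfold canonical
  rw [normShape_perm _ _ hp]

lemma normShape_shift (cs : List (Int × Int)) (a b : Int) (h : cs ≠ []) :
    normShape (cs.map (fun p => (p.1 + a, p.2 + b))) = normShape cs := by
  unfold normShape
  dsimp only
  have hx : (cs.map (fun p => (p.1 + a, p.2 + b))).map (fun p => p.1)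
      = (cs.map (fun p => p.1)).map (fun v => v + a) := by
    simp [List.map_map]
  have hy : (cs.map (fun p => (p.1 + a, p.2 + b))).map (fun p => p.2)
      = (cs.map (fun p => p.2)).map (fun v => v + b) := by
    simp [List.map_map]
  rw [hx, hy, min_id_shift _ a (by simpa using h), min_id_shift _ b (by simpa using h)]
  congr 1
  rw [List.map_map]
  apply List.map_congr_left
  intro p _
  simp [Function.comp]

lemma normShape_perm_self (cs : List (Int × Int)) :
    (normShape cs).Perm (cs.map (fun p =>
      (p.1 - (PySem.List.min? (cs.map (fun p => p.1)) (fun v => v)).getD 0,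
       p.2 - (PySem.List.min? (cs.map (fun p => p.2)) (fun v => v)).getD 0))) := by
  unfold normShape
  exact PySem.List.sorted_perm _ _ _

lemma rot_norm (cs : List (Int × Int)) (h : cs ≠ []) :
    rotate90 (normShape cs) = normShape (cs.map (fun p => (p.2, -p.1))) := by
  unfold rotate90
  set mx := (PySem.List.min? (cs.map (fun p => p.1)) (fun v => v)).getD 0 with hmx
  set my := (PySem.List.min? (cs.map (fun p => p.2)) (fun v => v)).getD 0 with hmy
  have h1 : ((normShape cs).map (fun p => (p.2, -p.1))).Perm
      ((cs.map (fun p => (p.2, -p.1))).map (fun p => (p.1 + (-my), p.2 + mx))) := by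
    refine ((normShape_perm_self cs).map (fun p : Int × Int => (p.2, -p.1))).trans
      (List.Perm.of_eq ?_)
    rw [List.map_map, List.map_map]
    apply List.map_congr_left
    intro p _
    simp [Function.comp, hmx.symm, hmy.symm]
    omega
  calc normShape ((normShape cs).map (fun p => (p.2, -p.1)))
      = normShape ((cs.map (fun p => (p.2, -p.1))).map (fun p => (p.1 + (-my), p.2 + mx))) :=
        normShape_perm _ _ h1
    _ = normShape (cs.map (fun p => (p.2, -p.1))) :=
        normShape_shift _ _ _ (by simpa using h)

lemma canonical_eq (cells : List (Int × Int)) : canonicalAlt cells = canonical cells := by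
  rcases eq_or_ne cells [] with rfl | h
  · rfl
  · unfold canonical canonicalAlt
    dsimp only
    have e0 : cells.map (fun p => (p.1, p.2)) = cells := by simp
    have e1 : rotate90 (normShape cells) = normShape (cells.map (fun p => (p.2, -p.1))) :=
      rot_norm cells h
    have e2 : rotate90 (normShape (cells.map (fun p => (p.2, -p.1))))
        = normShape (cells.map (fun p => (-p.1, -p.2))) := by
      rw [rot_norm _ (by simpa using h), List.map_map]
      rfl
    have e3 : rotate90 (normShape (cells.map (fun p => (-p.1, -p.2))))
        = normShape (cells.map (fun p => (-p.2, p.1))) := by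
      rw [rot_norm _ (by simpa using h), List.map_map]
      congr 1
      apply List.map_congr_left
      intro p _
      simp [Function.comp]
    rw [e0, e1, e2, e3]

-- ---- the two extractors give the same canonical keys, in the same order ----

lemma map_eq_of_forall₂ {α β γ : Type} {f : α → γ} {g : β → γ} {l1 : List α} {l2 : List β}
    (h : List.Forall₂ (fun a b => f a = g b) l1 l2) : l1.map f = l2.map g := by
  induction h with
  | nil => rfl
  | cons hab _ ih => simp [ih, hab]

lemma mem_tcells {b : List (List Int)} {t : Int} {x : Int × Int} :
    x ∈ tcells b t ↔ Tgt b t x := by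
  unfold tcells
  rw [List.mem_filter, mem_raster]
  unfold Tgt
  simp
  tauto

lemma extract_map_canonical (b : List (List Int)) (t : Int) :
    (extractUF b t).map canonical = (bfsExtract b t).map canonical := by
  rw [extractUF_eq, List.map_map]
  refine map_eq_of_forall₂ (forall₂_imp_mem ?_ (bfs_forall2 b t))
  intro r _ sh hR
  apply canonical_perm
  have hnd : ((tcells b t).filter (fun c => rootOf b t c == r)).Nodup :=
    ((raster_nodup _).filter _).filter _
  refine (List.perm_ext_iff_of_nodup hnd hR.1).mpr ?_
  intro x
  rw [hR.2 x, List.mem_filter]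
  constructor
  · rintro ⟨hx, hr⟩
    exact ⟨mem_tcells.mp hx, by simpa using hr⟩
  · rintro ⟨hTx, hr⟩
    exact ⟨mem_tcells.mpr hTx, by simpa using hr⟩

-- ---- matching: A's greedy decrement loop is the closed-form min-of-counts sum ----

lemma len_normShape (cs : List (Int × Int)) : (normShape cs).length = cs.length := by
  have := (normShape_perm_self cs).length_eq
  simpa using this

lemma len_rotate90 (cs : List (Int × Int)) : (rotate90 cs).length = cs.length := by
  unfold rotate90
  rw [len_normShape]
  simp

lemma formMin_mem (base : List (Int × Int)) (rest : List (List (Int × Int))) :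
    formMin base rest = base ∨ formMin base rest ∈ rest := by
  induction rest generalizing base with
  | nil => left; rfl
  | cons r rs ih =>
    have : formMin base (r :: rs) = formMin (if listLtB r base then r else base) rs := rfl
    rw [this]
    rcases ih (if listLtB r base then r else base) with he | hm
    · rw [he]
      split_ifs
      · right; exact List.mem_cons_self
      · left; rfl
    · right; exact List.mem_cons_of_mem _ hm

lemma canonical_length (cs : List (Int × Int)) : (canonical cs).length = cs.length := by
  unfold canonical
  dsimp only
  rcases formMin_mem (normShape cs) [rotate90 (normShape cs), rotate90 (rotate90 (normShape cs)),
      rotate90 (rotate90 (rotate90 (normShape cs)))] with he | hm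
  · rw [he, len_normShape]
  · simp only [List.mem_cons, List.not_mem_nil, or_false] at hm
    rcases hm with h1 | h1 | h1 <;> rw [h1] <;> simp [len_rotate90, len_normShape]

lemma greedy_eq {κ : Type} [BEq κ] [LawfulBEq κ] [DecidableEq κ] (w : κ → Int)
    (hs : List κ) (pc : PySem.Dict κ Int) (acc : Int) (hnn : ∀ k, 0 ≤ pc.getD k 0) :
    (hs.foldl (fun (st : PySem.Dict κ Int × Int) k =>
        if st.1.getD k 0 > 0 then (st.1.insert k (st.1.getD k 0 - 1), st.2 + w k) else st)
      (pc, acc)).2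
    = acc + ∑ x ∈ hs.toFinset, min (pc.getD x 0) ((hs.count x : Int)) * w x := by
  induction hs generalizing pc acc with
  | nil => simp
  | cons k t ih =>
    rw [List.foldl_cons]
    by_cases hpos : pc.getD k 0 > 0
    · rw [if_pos hpos]
      have hnn' : ∀ x, 0 ≤ (pc.insert k (pc.getD k 0 - 1)).getD x 0 := by
        intro x
        rw [PySem.Dict.getD_insert]
        split_ifs with hx
        · subst hx; omega
        · exact hnn x
      rw [ih _ _ hnn']
      by_cases hk : k ∈ t.toFinset
      · have hins : (k :: t).toFinset = t.toFinset := by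
          simp [List.toFinset_cons, Finset.insert_eq_self.mpr hk]
        rw [hins]
        rw [← Finset.add_sum_erase _ _ hk, ← Finset.add_sum_erase _ _ hk]
        have hterms : ∑ x ∈ t.toFinset.erase k,
              min ((pc.insert k (pc.getD k 0 - 1)).getD x 0) ((t.count x : Int)) * w x
            = ∑ x ∈ t.toFinset.erase k, min (pc.getD x 0) (((k :: t).count x : Int)) * w x := by
          apply Finset.sum_congr rfl
          intro x hx
          have hne : x ≠ k := (Finset.mem_erase.mp hx).1
          rw [PySem.Dict.getD_insert, if_neg hne, List.count_cons]
          simp [Ne.symm hne]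
        rw [hterms]
        have hkterm : min ((pc.insert k (pc.getD k 0 - 1)).getD k 0) ((t.count k : Int))
            = min (pc.getD k 0) (((k :: t).count k : Int)) - 1 := by
          rw [PySem.Dict.getD_insert, if_pos rfl, List.count_cons]
          simp
          omega
        rw [hkterm]
        ring
      · have hcnt : t.count k = 0 := by
          rwa [List.count_eq_zero, ← List.mem_toFinset]
        rw [List.toFinset_cons, Finset.sum_insert hk]
        have hterms : ∑ x ∈ t.toFinset,
              min ((pc.insert k (pc.getD k 0 - 1)).getD x 0) ((t.count x : Int)) * w x
            = ∑ x ∈ t.toFinset, min (pc.getD x 0) (((k :: t).count x : Int)) * w x := by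
          apply Finset.sum_congr rfl
          intro x hx
          have hne : x ≠ k := by rintro rfl; exact hk hx
          rw [PySem.Dict.getD_insert, if_neg hne, List.count_cons]
          simp [Ne.symm hne]
        rw [hterms]
        have : min (pc.getD k 0) (((k :: t).count k : Int)) = 1 := by
          rw [List.count_cons, hcnt]
          simp
          omega
        rw [this]
        ring
    · rw [if_neg hpos]
      have hz : pc.getD k 0 = 0 := le_antisymm (not_lt.mp hpos) (hnn k)
      rw [ih _ _ hnn]
      congr 1
      by_cases hk : k ∈ t.toFinset
      · have hins : (k :: t).toFinset = t.toFinset := by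
          simp [List.toFinset_cons, Finset.insert_eq_self.mpr hk]
        rw [hins]
        apply Finset.sum_congr rfl
        intro x hx
        by_cases hne : x = k
        · subst hne
          rw [hz]
          rw [min_eq_left (by positivity : (0:Int) ≤ (((x :: t).count x : Int))),
              min_eq_left (by positivity : (0:Int) ≤ ((t.count x : Int)))]
        · rw [List.count_cons]; simp [Ne.symm hne]
      · rw [List.toFinset_cons, Finset.sum_insert hk]
        have : min (pc.getD k 0) (((k :: t).count k : Int)) * w k = 0 := by
          rw [hz]
          have : (0:Int) ≤ ((k :: t).count k : Int) := by positivity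
          rw [min_eq_left this]
          ring
        rw [this, zero_add]
        apply Finset.sum_congr rfl
        intro x hx
        have hne : x ≠ k := by rintro rfl; exact hk hx
        rw [List.count_cons]
        simp [Ne.symm hne]

lemma foldl_pair_fst {κ β : Type} [BEq κ] (l : List β) (f : β → κ) (g : β → Int)
    (d1 d2 : PySem.Dict κ Int) :
    (l.foldl (fun st p => (st.1.insert (f p) (st.1.getD (f p) 0 + 1), st.2.insert (f p) (g p)))
      (d1, d2)).1
    = (l.map f).foldl (fun d k => d.insert k (d.getD k 0 + 1)) d1 := by
  induction l generalizing d1 d2 with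
  | nil => rfl
  | cons p t ih => exact ih _ _

lemma sum_ofList_toFinset {κ : Type} [BEq κ] [LawfulBEq κ] [DecidableEq κ]
    (xs : List κ) (g : κ → Int) :
    ((PySem.Set.ofList xs).map g).sum = ∑ x ∈ xs.toFinset, g x := by
  have h1 : (PySem.Set.ofList xs).toFinset = xs.toFinset := by
    apply Finset.ext
    intro a
    simp [List.mem_toFinset, PySem.Set.mem_ofList]
  rw [← h1, List.sum_toFinset g (PySem.Set.nodup_ofList xs)]

lemma matching_eq (pieces holes : List (List (Int × Int))) :
    (holes.foldl
      (fun (st : PySem.Dict (List (Int × Int)) Int × Int) h =>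
        if st.1.getD (canonical h) 0 > 0
        then (st.1.insert (canonical h) (st.1.getD (canonical h) 0 - 1), st.2 + (h.length : Int))
        else st)
      ((pieces.foldl
        (fun (st : PySem.Dict (List (Int × Int)) Int × PySem.Dict (List (Int × Int)) Int) p =>
          (st.1.insert (canonical p) (st.1.getD (canonical p) 0 + 1),
           st.2.insert (canonical p) (p.length : Int)))
        (PySem.Dict.empty, PySem.Dict.empty)).1, (0 : Int))).2
    = (PySem.Dict.counter (holes.map canonical)).items.foldl
        (fun acc kc => acc + min ((PySem.Dict.counter (pieces.map canonical)).getD kc.1 0) kc.2 * (kc.1.length : Int)) 0 := by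
  rw [foldl_pair_fst pieces canonical (fun p => (p.length : Int)),
      PySem.Dict.foldl_insert_getD_add_one_eq_counter]
  set pcD := PySem.Dict.counter (pieces.map canonical) with hpcD
  have hcongr : holes.foldl
      (fun (st : PySem.Dict (List (Int × Int)) Int × Int) h =>
        if st.1.getD (canonical h) 0 > 0
        then (st.1.insert (canonical h) (st.1.getD (canonical h) 0 - 1), st.2 + (h.length : Int))
        else st) (pcD, 0)
      = holes.foldl
      (fun (st : PySem.Dict (List (Int × Int)) Int × Int) h =>
        if st.1.getD (canonical h) 0 > 0
        then (st.1.insert (canonical h) (st.1.getD (canonical h) 0 - 1),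
              st.2 + ((canonical h).length : Int))
        else st) (pcD, 0) := by
    apply PySem.List.foldl_congr_mem
    intro acc x _
    rw [canonical_length]
  have hmap : holes.foldl
      (fun (st : PySem.Dict (List (Int × Int)) Int × Int) h =>
        if st.1.getD (canonical h) 0 > 0
        then (st.1.insert (canonical h) (st.1.getD (canonical h) 0 - 1),
              st.2 + ((canonical h).length : Int))
        else st) (pcD, 0)
      = (holes.map canonical).foldl
      (fun (st : PySem.Dict (List (Int × Int)) Int × Int) k =>
        if st.1.getD k 0 > 0
        then (st.1.insert k (st.1.getD k 0 - 1), st.2 + (k.length : Int))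
        else st) (pcD, 0) :=
    (List.foldl_map (f := canonical)
      (g := fun (st : PySem.Dict (List (Int × Int)) Int × Int) k =>
        if st.1.getD k 0 > 0
        then (st.1.insert k (st.1.getD k 0 - 1), st.2 + (k.length : Int))
        else st) (l := holes) (init := (pcD, 0))).symm
  rw [hcongr, hmap]
  rw [greedy_eq (fun k => (k.length : Int)) (holes.map canonical) pcD 0
        (by intro k; rw [hpcD, PySem.Dict.getD_counter]; positivity)]
  have hB : (PySem.Dict.counter (holes.map canonical)).items.foldl
        (fun acc kc => acc + min (pcD.getD kc.1 0) kc.2 * (kc.1.length : Int)) 0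
      = (PySem.Set.ofList (holes.map canonical)).foldl
        (fun acc k => acc + min (pcD.getD k 0) (((holes.map canonical).count k : Int)) * (k.length : Int)) 0 := by
    rw [PySem.Dict.items_counter]
    exact List.foldl_map (f := fun k => (k, ((holes.map canonical).count k : Int)))
      (g := fun acc kc => acc + min (pcD.getD kc.1 0) kc.2 * (kc.1.length : Int))
      (l := PySem.Set.ofList (holes.map canonical)) (init := 0)
  rw [hB, PySem.List.foldl_add
        (g := fun k => min (pcD.getD k 0) (((holes.map canonical).count k : Int)) * (k.length : Int))]
  rw [sum_ofList_toFinset]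

-- ===== VERDICT (by name: the statement is the Claim_ definition above) =====
theorem solution_spec : Claim_equal_solution := by
  intro gb tb _ _
  unfold Spec_solution solution solution_alt
  dsimp only
  rw [show canonicalAlt = canonical from funext canonical_eq]
  rw [extract_map_canonical tb 1, extract_map_canonical gb 0]
  exact matching_eq (bfsExtract tb 1) (bfsExtract gb 0)
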